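-- pv_equiv track=rewrite | github.com/arnavgupta9000/Leetcode | random/problem 1368.py | solve
-- ===== SOURCE A (Python) =====
-- from queue import deque
--
-- def solve(grid):
--     directions = {1:[0,1], 2:[0,-1], 3:[1,0], 4:[-1,0]}
--
--     rows, cols = len(grid), len(grid[0])
--
--     q = deque() # r, c, cost]
--     q.append((0,0,0))
--     min_cost = {(0,0): 0}
--
--     while q:
--         r, c, cost = q.popleft()
--
--         if (r,c) == (rows - 1, cols - 1): #reached target
--             return cost
--
--         for d in directions:
--             dr, dc = directions[d]
--             nr, nc = r + dr, c + dc
--             n_cost = cost if d == grid[r][c] else cost + 1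
--             if (nr < 0 or nc < 0 or nr == rows or nc == cols or n_cost >= min_cost.get((nr, nc), float("inf"))):
--                 continue
--
--             min_cost[(nr, nc)] = n_cost
--             if d == grid[r][c]:
--                 q.appendleft((nr,nc,n_cost))
--             else:
--                 q.append((nr,nc, n_cost))
-- ===== SOURCE B (Python) =====
-- def solve(grid):
--     # Bellman-Ford style relaxation: sweep all cells, relaxing their four
--     # outgoing 0/1-weight edges, until a fixpoint; no queue is maintained.
--     rows, cols = len(grid), len(grid[0])
--     dist = {(0, 0): 0}
--     for _ in range(rows * cols):
--         changed = False
--         for r in range(rows):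
--             for c in range(cols):
--                 d = dist.get((r, c))
--                 if d is None:
--                     continue
--                 for dd, dr, dc in ((1, 0, 1), (2, 0, -1), (3, 1, 0), (4, -1, 0)):
--                     nr, nc = r + dr, c + dc
--                     if 0 <= nr < rows and 0 <= nc < cols:
--                         nd = d + (0 if dd == grid[r][c] else 1)
--                         cur = dist.get((nr, nc))
--                         if cur is None or nd < cur:
--                             dist[(nr, nc)] = nd
--                             changed = True
--         if not changed:
--             break
--     return dist[(rows - 1, cols - 1)]
-- ===== Notes on version B (the rewrite author's own statement) =====
-- stated objective: alternative
-- what changed: A's 0-1 BFS (deque with appendleft/append and a min_cost dict) is replaced by Bellman-Ford-style dynamic programming: repeated full-grid relaxation sweeps over a distance dict until a fixpoint (no queue or frontier of any kind), reading the answer off the converged table.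
-- outside the precondition, e.g. on solve([[7], []]): A returns 1, B raises IndexError; on solve([[1, 2], [3]]): A returns 1, B raises IndexError
import Mathlib
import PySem

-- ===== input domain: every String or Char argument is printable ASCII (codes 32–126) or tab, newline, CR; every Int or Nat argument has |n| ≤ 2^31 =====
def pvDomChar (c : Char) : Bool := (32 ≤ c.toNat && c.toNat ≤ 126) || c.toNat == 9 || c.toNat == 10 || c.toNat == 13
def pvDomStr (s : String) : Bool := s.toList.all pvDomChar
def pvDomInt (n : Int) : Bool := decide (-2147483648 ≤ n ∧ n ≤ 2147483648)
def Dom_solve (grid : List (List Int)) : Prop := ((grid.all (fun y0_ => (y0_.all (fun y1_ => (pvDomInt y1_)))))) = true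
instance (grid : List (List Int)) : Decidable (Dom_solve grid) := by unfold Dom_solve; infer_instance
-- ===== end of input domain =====

-- B replaces A's 0-1 BFS deque entirely by Bellman-Ford-style dynamic programming:
-- full-grid relaxation sweeps over a distance dict until a fixpoint; same return value.

-- ===== PORT A =====
-- directions = {1:[0,1], 2:[0,-1], 3:[1,0], 4:[-1,0]}
def solveDirections : PySem.Dict Int (Int × Int) :=
  PySem.Dict.ofList [(1, (0, 1)), (2, (0, -1)), (3, (1, 0)), (4, (-1, 0))]

-- body of `for d in directions: ...` acting on the loop state (q, min_cost)
def solveBody (grid : List (List Int)) (rows cols r c cost : Int)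
    (st : List (Int × Int × Int) × PySem.Dict (Int × Int) Int) (d : Int) :
    List (Int × Int × Int) × PySem.Dict (Int × Int) Int :=
  let dd := solveDirections.getD d (0, 0)
  let nr := r + dd.1
  let nc := c + dd.2
  -- grid[r][c]: popped cells are in range under Pre_solve, so pyGetD is exact there
  let ncost := if d = PySem.List.pyGetD (PySem.List.pyGetD grid r []) c 0 then cost else cost + 1
  let skip : Bool :=
    decide (nr < 0) || decide (nc < 0) || decide (nr = rows) || decide (nc = cols) ||
      (match st.2.get? (nr, nc) with
       | some v => decide (ncost ≥ v)   -- n_cost >= min_cost[(nr, nc)]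
       | none => false)                 -- .get misses: default float("inf"), n_cost >= inf is False
  if skip then st
  else
    let mc := st.2.insert (nr, nc) ncost
    if d = PySem.List.pyGetD (PySem.List.pyGetD grid r []) c 0 then ((nr, nc, ncost) :: st.1, mc)
    else (st.1 ++ [(nr, nc, ncost)], mc)

def solveFuel (rows cols : Int) : Nat := ((rows * cols).toNat + 2) ^ 3

-- while q: pop left, return at target, else relax the four directions
-- (fuel only totalizes the while loop; 0 is also the stand-in for Python's
--  fall-through None, which is unreachable under Pre_solve)
def solveLoop (grid : List (List Int)) (rows cols : Int) :
    Nat → List (Int × Int × Int) → PySem.Dict (Int × Int) Int → Int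
  | 0, _, _ => 0
  | _ + 1, [], _ => 0
  | fuel + 1, (r, c, cost) :: qrest, mc =>
      if r = rows - 1 ∧ c = cols - 1 then cost
      else
        let st := solveDirections.keys.foldl (solveBody grid rows cols r c cost) (qrest, mc)
        solveLoop grid rows cols fuel st.1 st.2

def solve (grid : List (List Int)) : Int :=
  let rows : Int := grid.length
  -- len(grid[0]); the IndexError on grid == [] is excluded by Pre_solve
  let cols : Int := (PySem.List.pyGetD grid 0 []).length
  solveLoop grid rows cols (solveFuel rows cols) [(0, 0, 0)]
    (PySem.Dict.ofList [((0, 0), 0)])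

-- ===== PORT B =====
-- ((dd, dr, dc)) triples of the direction tuple in Source B
def bfDirs : List (Int × Int × Int) := [(1, 0, 1), (2, 0, -1), (3, 1, 0), (4, -1, 0)]

-- body of `for dd, dr, dc in ...`: relax one outgoing edge of cell (r, c) whose
-- distance read at cell-processing time was d0; state is (dist, changed)
def bfDirBody (grid : List (List Int)) (rows cols r c d0 : Int)
    (st : PySem.Dict (Int × Int) Int × Bool) (dd : Int × Int × Int) :
    PySem.Dict (Int × Int) Int × Bool :=
  let nr := r + dd.2.1
  let nc := c + dd.2.2
  if 0 ≤ nr ∧ nr < rows ∧ 0 ≤ nc ∧ nc < cols then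
    let nd := d0 + (if dd.1 = PySem.List.pyGetD (PySem.List.pyGetD grid r []) c 0 then 0 else 1)
    match st.1.get? (nr, nc) with
    | none => (st.1.insert (nr, nc) nd, true)          -- cur is None
    | some cur => if nd < cur then (st.1.insert (nr, nc) nd, true) else st
  else st

-- body of the `for c in range(cols)` loop: d = dist.get((r,c)); None → continue
def bfCell (grid : List (List Int)) (rows cols : Int)
    (st : PySem.Dict (Int × Int) Int × Bool) (r c : Int) :
    PySem.Dict (Int × Int) Int × Bool :=
  match st.1.get? (r, c) with
  | none => st
  | some d0 => bfDirs.foldl (bfDirBody grid rows cols r c d0) st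

-- one sweep: `changed = False; for r in range(rows): for c in range(cols): ...`
def bfSweep (grid : List (List Int)) (rows cols : Int) (dist : PySem.Dict (Int × Int) Int) :
    PySem.Dict (Int × Int) Int × Bool :=
  (PySem.List.pyRange 0 rows 1).foldl
    (fun st r => (PySem.List.pyRange 0 cols 1).foldl (fun st c => bfCell grid rows cols st r c) st)
    (dist, false)

-- `for _ in range(rows*cols): ...sweep...; if not changed: break`
def bfLoop (grid : List (List Int)) (rows cols : Int) :
    Nat → PySem.Dict (Int × Int) Int → PySem.Dict (Int × Int) Int
  | 0, dist => dist
  | n + 1, dist =>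
      let s := bfSweep grid rows cols dist
      if s.2 then bfLoop grid rows cols n s.1 else s.1

def solve_alt (grid : List (List Int)) : Int :=
  let rows : Int := grid.length
  let cols : Int := (PySem.List.pyGetD grid 0 []).length
  -- dist[(rows-1, cols-1)]: under Pre_solve the key is always present (proved below),
  -- so the .getD 0 default is never taken and the port is exact there
  ((bfLoop grid rows cols (rows * cols).toNat (PySem.Dict.ofList [((0, 0), 0)])).get?
      (rows - 1, cols - 1)).getD 0

-- ===== PRECONDITION & SPEC =====
-- Pre_solve excludes the empty grid and grids whose first row is empty (A raises
-- IndexError there), and grids with a row shorter than row 0: on those A raises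
-- IndexError as soon as the traversal reaches a missing cell, which is on almost all
-- of them; whether it raises at all depends on the accidental traversal order, so
-- the whole ragged class is excluded (rows longer than row 0 are never indexed
-- past cols and stay inside Pre_solve).
def Pre_solve (grid : List (List Int)) : Prop :=
  0 < grid.length ∧ 0 < (grid.headD []).length ∧
    ∀ row ∈ grid, (grid.headD []).length ≤ row.length
instance (grid : List (List Int)) : Decidable (Pre_solve grid) := by
  unfold Pre_solve; infer_instance

def pvWitness_solve : List (List Int) := [[1, 1], [3, 1]]

def Spec_solve (grid : List (List Int)) (out : Int) : Prop := out = solve_alt grid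
instance (grid : List (List Int)) (out : Int) : Decidable (Spec_solve grid out) := by
  unfold Spec_solve; infer_instance

-- ===== CLAIM (what is proved, stated in full; the proofs are below) =====
def Claim_equal_solve : Prop :=
  ∀ (grid : List (List Int)), Dom_solve grid → Pre_solve grid → Spec_solve grid (solve grid)

-- ===== LEMMAS AND PROOFS =====

-- ---------- the weighted grid graph ----------

def pvCell (grid : List (List Int)) (p : Int × Int) : Int :=
  PySem.List.pyGetD (PySem.List.pyGetD grid p.1 []) p.2 0

def pvDirsL : List Int := [1, 2, 3, 4]

def pvMv (d : Int) (p : Int × Int) : Int × Int :=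
  if d = 1 then (p.1, p.2 + 1)
  else if d = 2 then (p.1, p.2 - 1)
  else if d = 3 then (p.1 + 1, p.2)
  else (p.1 - 1, p.2)

def pvWt (grid : List (List Int)) (p : Int × Int) (d : Int) : Int :=
  if d = pvCell grid p then 0 else 1

def pvInb (rows cols : Int) (p : Int × Int) : Prop :=
  0 ≤ p.1 ∧ p.1 < rows ∧ 0 ≤ p.2 ∧ p.2 < cols

-- cost-k walks of the grid graph, from (0,0)
inductive pvReach (grid : List (List Int)) (rows cols : Int) : Int → (Int × Int) → Prop
  | start : pvReach grid rows cols 0 (0, 0)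
  | step {k : Int} {u : Int × Int} (d : Int) :
      pvReach grid rows cols k u → d ∈ pvDirsL → pvInb rows cols (pvMv d u) →
      pvReach grid rows cols (k + pvWt grid u d) (pvMv d u)

-- cost-c walks from u to v (peeled from the front)
inductive pvRF (grid : List (List Int)) (rows cols : Int) : (Int × Int) → Int → (Int × Int) → Prop
  | refl (u : Int × Int) : pvRF grid rows cols u 0 u
  | cons {u : Int × Int} {c : Int} {v : Int × Int} (d : Int) :
      d ∈ pvDirsL → pvInb rows cols (pvMv d u) → pvRF grid rows cols (pvMv d u) c v →
      pvRF grid rows cols u (pvWt grid u d + c) v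

def pvIsDelta (grid : List (List Int)) (rows cols : Int) (v : Int × Int) (k : Int) : Prop :=
  pvReach grid rows cols k v ∧ ∀ j, pvReach grid rows cols j v → k ≤ j

-- ---------- main interface lemmas (proofs follow) ----------

lemma pvWt_nonneg (grid : List (List Int)) (p : Int × Int) (d : Int) :
    0 ≤ pvWt grid p d ∧ pvWt grid p d ≤ 1 := by
  unfold pvWt; split_ifs <;> omega

lemma pvReach_nonneg {grid : List (List Int)} {rows cols k : Int} {v : Int × Int}
    (h : pvReach grid rows cols k v) : 0 ≤ k := by
  induction h with
  | start => omega
  | @step k u d _ _ _ ih => have := pvWt_nonneg grid u d; omega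

lemma pvReach_inb {grid : List (List Int)} {rows cols k : Int} {v : Int × Int}
    (h0 : pvInb rows cols (0, 0)) (h : pvReach grid rows cols k v) : pvInb rows cols v := by
  induction h with
  | start => exact h0
  | step d _ _ hin _ => exact hin

lemma pvRF_nonneg {grid : List (List Int)} {rows cols : Int} {u : Int × Int} {c : Int}
    {v : Int × Int} (h : pvRF grid rows cols u c v) : 0 ≤ c := by
  induction h with
  | refl => omega
  | @cons u c v d _ _ _ ih => have := pvWt_nonneg grid u d; omega

lemma pvRF_snoc {grid : List (List Int)} {rows cols : Int} {u : Int × Int} {c : Int}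
    {v : Int × Int} (h : pvRF grid rows cols u c v) (d : Int) (hd : d ∈ pvDirsL)
    (hin : pvInb rows cols (pvMv d v)) :
    pvRF grid rows cols u (c + pvWt grid v d) (pvMv d v) := by
  induction h with
  | refl u =>
      have h2 := pvRF.cons (grid := grid) (rows := rows) (cols := cols) d hd hin (pvRF.refl _)
      simpa using h2
  | @cons u' c' v' d' hd' hin' _ ih =>
      have h2 := pvRF.cons (grid := grid) (rows := rows) (cols := cols) d' hd' hin' (ih hin)
      have harith : pvWt grid u' d' + (c' + pvWt grid v' d) = (pvWt grid u' d' + c') + pvWt grid v' d := by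
        ring
      rw [harith] at h2
      exact h2

lemma pvRF_trans_reach {grid : List (List Int)} {rows cols : Int} {u : Int × Int} {c : Int}
    {v : Int × Int} (hrf : pvRF grid rows cols u c v) :
    ∀ j, pvReach grid rows cols j u → pvReach grid rows cols (j + c) v := by
  induction hrf with
  | refl u => intro j hj; simpa using hj
  | @cons u' c' v' d hd hin _ ih =>
      intro j hj
      have h2 := ih (j + pvWt grid u' d) (pvReach.step d hj hd hin)
      have harith : j + pvWt grid u' d + c' = j + (pvWt grid u' d + c') := by ring
      rw [harith] at h2
      exact h2

lemma pvReach_iff_RF {grid : List (List Int)} {rows cols : Int} {k : Int} {v : Int × Int} :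
    pvReach grid rows cols k v ↔ pvRF grid rows cols (0, 0) k v := by
  constructor
  · intro h
    induction h with
    | start => exact pvRF.refl _
    | step d _ hd hin ih => exact pvRF_snoc ih d hd hin
  · intro h
    have := pvRF_trans_reach h 0 pvReach.start
    simpa using this

-- staircase: every in-bounds cell is reachable with cost ≤ r + c
lemma pvStaircase (grid : List (List Int)) (rows cols : Int) :
    ∀ (n : Nat) (r c : Int), r + c = n → 0 ≤ r → r < rows → 0 ≤ c → c < cols →
      ∃ k, 0 ≤ k ∧ k ≤ r + c ∧ pvReach grid rows cols k (r, c) := by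
  intro n
  induction n with
  | zero =>
      intro r c hn hr0 hr1 hc0 hc1
      have : r = 0 ∧ c = 0 := by omega
      obtain ⟨rfl, rfl⟩ := this
      exact ⟨0, by omega, by omega, pvReach.start⟩
  | succ m ih =>
      intro r c hn hr0 hr1 hc0 hc1
      by_cases hc : 0 < c
      · obtain ⟨k, hk0, hk1, hk⟩ := ih r (c - 1) (by omega) hr0 hr1 (by omega) (by omega)
        have hin : pvInb rows cols (pvMv 1 (r, c - 1)) := by
          simp [pvMv, pvInb]; omega
        have := pvReach.step 1 hk (by simp [pvDirsL]) hin
        have hmv : pvMv 1 (r, c - 1) = (r, c) := by simp [pvMv]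
        rw [hmv] at this
        refine ⟨k + pvWt grid (r, c - 1) 1, ?_, ?_, this⟩ <;>
          (have := pvWt_nonneg grid (r, c - 1) 1; omega)
      · have hr : 0 < r := by omega
        obtain ⟨k, hk0, hk1, hk⟩ := ih (r - 1) c (by omega) (by omega) (by omega) hc0 hc1
        have hin : pvInb rows cols (pvMv 3 (r - 1, c)) := by
          simp [pvMv, pvInb]; omega
        have := pvReach.step 3 hk (by simp [pvDirsL]) hin
        have hmv : pvMv 3 (r - 1, c) = (r, c) := by simp [pvMv]
        rw [hmv] at this
        refine ⟨k + pvWt grid (r - 1, c) 3, ?_, ?_, this⟩ <;>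
          (have := pvWt_nonneg grid (r - 1, c) 3; omega)

lemma pvDelta_exists (grid : List (List Int)) (rows cols : Int) (v : Int × Int)
    (hreach : ∃ k, 0 ≤ k ∧ pvReach grid rows cols k v) :
    ∃ dlt, pvIsDelta grid rows cols v dlt := by
  obtain ⟨k, hk0, hk⟩ := hreach
  haveI : DecidablePred fun n : Nat => pvReach grid rows cols (n : Int) v :=
    fun n => Classical.dec _
  have hex : ∃ n : Nat, pvReach grid rows cols (n : Int) v := by
    refine ⟨k.toNat, ?_⟩
    rwa [Int.toNat_of_nonneg hk0]
  refine ⟨(Nat.find hex : Nat), ⟨Nat.find_spec hex, ?_⟩⟩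
  intro j hj
  have hj0 : 0 ≤ j := pvReach_nonneg hj
  have hj' : pvReach grid rows cols ((j.toNat : Nat) : Int) v := by
    rwa [Int.toNat_of_nonneg hj0]
  have hle : Nat.find hex ≤ j.toNat := Nat.find_le hj'
  omega


-- ---------- the L machine: A's deque traversal rephrased with explicit levels ----------
-- (proof-side helper only; the coupling below proves solve ≡ pvLRun, and the
--  correctness development further below proves pvLRun returns the least cost)

def pvLDirs : List (Int × Int × Int) := [(1, 0, 1), (2, 0, -1), (3, 1, 0), (4, -1, 0)]

def pvLBody (grid : List (List Int)) (rows cols r c level : Int)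
    (st : List (Int × Int) × List (Int × Int) × PySem.Dict (Int × Int) Int)
    (dd : Int × Int × Int) :
    List (Int × Int) × List (Int × Int) × PySem.Dict (Int × Int) Int :=
  let nr := r + dd.2.1
  let nc := c + dd.2.2
  if 0 ≤ nr ∧ nr < rows ∧ 0 ≤ nc ∧ nc < cols then
    let ncost := if dd.1 = PySem.List.pyGetD (PySem.List.pyGetD grid r []) c 0 then level else level + 1
    let ok : Bool :=
      match st.2.2.get? (nr, nc) with
      | none => true
      | some b => decide (ncost < b)
    if ok then
      let best := st.2.2.insert (nr, nc) ncost
      if ncost = level then ((nr, nc) :: st.1, st.2.1, best)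
      else (st.1, (nr, nc) :: st.2.1, best)
    else st
  else st

def pvLLoop (grid : List (List Int)) (rows cols : Int) :
    Nat → List (Int × Int) → List (Int × Int) → Int → PySem.Dict (Int × Int) Int → Int
  | 0, _, _, _, _ => 0
  | fuel + 1, cur0, nxt0, level0, best =>
      if cur0 = [] ∧ nxt0 = [] then 0
      else
        match (if cur0 = [] then (nxt0.reverse, ([] : List (Int × Int)), level0 + 1)
               else (cur0, nxt0, level0)) with
        | ([], _, _) => 0
        | ((r, c) :: cur, nxt, level) =>
            if r = rows - 1 ∧ c = cols - 1 then level
            else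
              let st := pvLDirs.foldl (pvLBody grid rows cols r c level) (cur, nxt, best)
              pvLLoop grid rows cols fuel st.1 st.2.1 level st.2.2

def pvLRun (grid : List (List Int)) : Int :=
  let rows : Int := grid.length
  let cols : Int := (PySem.List.pyGetD grid 0 []).length
  pvLLoop grid rows cols (solveFuel rows cols) [(0, 0)] [] 0
    (PySem.Dict.ofList [((0, 0), 0)])

-- ---------- coupling: solve ≡ pvLRun ----------

def pvExt (lv : Int) (p : Int × Int) : Int × Int × Int := (p.1, p.2, lv)

def pvRel (rows cols level : Int)
    (sA : List (Int × Int × Int) × PySem.Dict (Int × Int) Int)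
    (sB : List (Int × Int) × List (Int × Int) × PySem.Dict (Int × Int) Int) : Prop :=
  sA.1 = sB.1.map (pvExt level) ++ sB.2.1.reverse.map (pvExt (level + 1)) ∧
  sA.2 = sB.2.2 ∧
  (∀ p ∈ sB.1, pvInb rows cols p) ∧ (∀ p ∈ sB.2.1, pvInb rows cols p)

lemma pvBody_rel (grid : List (List Int)) (rows cols r c level d dr dc : Int)
    (hd : solveDirections.getD d (0, 0) = (dr, dc)) (hdr : dr ≤ 1) (hdc : dc ≤ 1)
    (_hr0 : 0 ≤ r) (hr1 : r < rows) (_hc0 : 0 ≤ c) (hc1 : c < cols)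
    (sA : List (Int × Int × Int) × PySem.Dict (Int × Int) Int)
    (sB : List (Int × Int) × List (Int × Int) × PySem.Dict (Int × Int) Int)
    (h : pvRel rows cols level sA sB) :
    pvRel rows cols level (solveBody grid rows cols r c level sA d)
      (pvLBody grid rows cols r c level sB (d, dr, dc)) := by
  obtain ⟨q, mc⟩ := sA
  obtain ⟨cur, nxt, best⟩ := sB
  obtain ⟨hq, hmc, hcur, hnxt⟩ := h
  simp only at hq hmc hcur hnxt
  subst hmc
  simp only [solveBody, pvLBody, hd]
  by_cases hb : 0 ≤ r + dr ∧ r + dr < rows ∧ 0 ≤ c + dc ∧ c + dc < cols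
  · rw [if_pos hb]
    have h1 : ¬ (r + dr < 0) := by omega
    have h2 : ¬ (c + dc < 0) := by omega
    have h3 : ¬ (r + dr = rows) := by omega
    have h4 : ¬ (c + dc = cols) := by omega
    simp only [h1, h2, h3, h4, decide_false, Bool.false_or]
    have hpush : ∀ (mc' : PySem.Dict (Int × Int) Int),
        pvRel rows cols level
          (if d = PySem.List.pyGetD (PySem.List.pyGetD grid r []) c 0 then
            ((r + dr, c + dc,
                if d = PySem.List.pyGetD (PySem.List.pyGetD grid r []) c 0 then level
                else level + 1) :: q, mc')
          else
            (q ++ [(r + dr, c + dc,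
                if d = PySem.List.pyGetD (PySem.List.pyGetD grid r []) c 0 then level
                else level + 1)], mc'))
          (if (if d = PySem.List.pyGetD (PySem.List.pyGetD grid r []) c 0 then level
                else level + 1) = level then
            ((r + dr, c + dc) :: cur, nxt, mc')
          else (cur, (r + dr, c + dc) :: nxt, mc')) := by
      intro mc'
      by_cases hdg : d = PySem.List.pyGetD (PySem.List.pyGetD grid r []) c 0
      · simp only [hdg, if_true]
        refine ⟨by simp [hq, pvExt], rfl, ?_, hnxt⟩
        intro p hp
        rcases List.mem_cons.mp hp with rfl | hp
        · exact ⟨hb.1, hb.2.1, hb.2.2.1, hb.2.2.2⟩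
        · exact hcur p hp
      · have hne : ¬ (level + 1 = level) := by omega
        simp only [hdg, if_false, if_neg hne]
        refine ⟨by simp [hq, pvExt], rfl, hcur, ?_⟩
        intro p hp
        rcases List.mem_cons.mp hp with rfl | hp
        · exact ⟨hb.1, hb.2.1, hb.2.2.1, hb.2.2.2⟩
        · exact hnxt p hp
    rcases hget : mc.get? (r + dr, c + dc) with _ | v
    · simpa using hpush _
    · by_cases hvlt :
        (if d = PySem.List.pyGetD (PySem.List.pyGetD grid r []) c 0 then level
          else level + 1) < v
      · have hge : ¬ ((if d = PySem.List.pyGetD (PySem.List.pyGetD grid r []) c 0 then level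
            else level + 1) ≥ v) := by omega
        simp only [hge, decide_false, hvlt, decide_true, if_false, if_true,
          Bool.false_eq_true]
        exact hpush _
      · have hge : (if d = PySem.List.pyGetD (PySem.List.pyGetD grid r []) c 0 then level
            else level + 1) ≥ v := by omega
        simp only [hge, decide_true, hvlt, decide_false, Bool.false_eq_true, reduceIte]
        exact ⟨hq, rfl, hcur, hnxt⟩
  · rw [if_neg hb]
    have key : r + dr < 0 ∨ c + dc < 0 ∨ r + dr = rows ∨ c + dc = cols := by omega
    have hskip : (decide (r + dr < 0) || decide (c + dc < 0) || decide (r + dr = rows) ||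
        decide (c + dc = cols) ||
        (match mc.get? (r + dr, c + dc) with
          | some v =>
            decide ((if d = PySem.List.pyGetD (PySem.List.pyGetD grid r []) c 0 then level
                else level + 1) ≥ v)
          | none => false)) = true := by
      rcases key with hk | hk | hk | hk <;> simp [hk]
    rw [if_pos hskip]
    exact ⟨hq, rfl, hcur, hnxt⟩

lemma pvFoldl_rel {α β γ : Type} (R : α → β → Prop) (f : α → γ → α) (g : β → γ → β)
    (l : List γ) (h : ∀ x ∈ l, ∀ a b, R a b → R (f a x) (g b x)) :
    ∀ a b, R a b → R (l.foldl f a) (l.foldl g b) := by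
  induction l with
  | nil => intro a b hab; simpa using hab
  | cons x xs ih =>
      intro a b hab
      simp only [List.foldl_cons]
      exact ih (fun y hy => h y (List.mem_cons_of_mem _ hy)) _ _
        (h x List.mem_cons_self a b hab)

lemma pvFold_rel (grid : List (List Int)) (rows cols r c level : Int)
    (hr0 : 0 ≤ r) (hr1 : r < rows) (hc0 : 0 ≤ c) (hc1 : c < cols)
    (sA : List (Int × Int × Int) × PySem.Dict (Int × Int) Int)
    (sB : List (Int × Int) × List (Int × Int) × PySem.Dict (Int × Int) Int)
    (h : pvRel rows cols level sA sB) :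
    pvRel rows cols level
      (solveDirections.keys.foldl (solveBody grid rows cols r c level) sA)
      (pvLDirs.foldl (pvLBody grid rows cols r c level) sB) := by
  have hkeys : solveDirections.keys = pvLDirs.map (·.1) := by decide
  rw [hkeys, List.foldl_map]
  refine pvFoldl_rel _ _ _ _ ?_ sA sB h
  intro x hx a b hab
  simp only [pvLDirs, List.mem_cons, List.not_mem_nil, or_false] at hx
  rcases hx with rfl | rfl | rfl | rfl
  · exact pvBody_rel grid rows cols r c level 1 0 1 (by decide) (by decide) (by decide)
      hr0 hr1 hc0 hc1 a b hab
  · exact pvBody_rel grid rows cols r c level 2 0 (-1) (by decide) (by decide) (by decide)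
      hr0 hr1 hc0 hc1 a b hab
  · exact pvBody_rel grid rows cols r c level 3 1 0 (by decide) (by decide) (by decide)
      hr0 hr1 hc0 hc1 a b hab
  · exact pvBody_rel grid rows cols r c level 4 (-1) 0 (by decide) (by decide) (by decide)
      hr0 hr1 hc0 hc1 a b hab

lemma pvLoop_rel (grid : List (List Int)) (rows cols : Int) :
    ∀ (fuel : Nat) (cur nxt : List (Int × Int)) (level : Int)
      (best : PySem.Dict (Int × Int) Int),
      (∀ p ∈ cur, pvInb rows cols p) → (∀ p ∈ nxt, pvInb rows cols p) →
      solveLoop grid rows cols fuel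
          (cur.map (pvExt level) ++ nxt.reverse.map (pvExt (level + 1))) best
        = pvLLoop grid rows cols fuel cur nxt level best := by
  intro fuel
  induction fuel with
  | zero => intro cur nxt level best _ _; rfl
  | succ fuel ih =>
    intro cur nxt level best hcur hnxt
    cases cur with
    | cons p curRest =>
      obtain ⟨r, c⟩ := p
      have hrc := hcur (r, c) List.mem_cons_self
      have hA : solveLoop grid rows cols (fuel + 1)
          (((r, c) :: curRest).map (pvExt level) ++ nxt.reverse.map (pvExt (level + 1))) best
          = if r = rows - 1 ∧ c = cols - 1 then level
            else
              let st := solveDirections.keys.foldl (solveBody grid rows cols r c level)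
                (curRest.map (pvExt level) ++ nxt.reverse.map (pvExt (level + 1)), best)
              solveLoop grid rows cols fuel st.1 st.2 := by
        simp [pvExt, solveLoop]
      have hB : pvLLoop grid rows cols (fuel + 1) ((r, c) :: curRest) nxt level best
          = if r = rows - 1 ∧ c = cols - 1 then level
            else
              let st := pvLDirs.foldl (pvLBody grid rows cols r c level)
                (curRest, nxt, best)
              pvLLoop grid rows cols fuel st.1 st.2.1 level st.2.2 := by
        simp [pvLLoop]
      rw [hA, hB]
      by_cases htgt : r = rows - 1 ∧ c = cols - 1
      · simp [htgt]
      · simp only [if_neg htgt]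
        have hrel := pvFold_rel grid rows cols r c level hrc.1 hrc.2.1 hrc.2.2.1 hrc.2.2.2
          (curRest.map (pvExt level) ++ nxt.reverse.map (pvExt (level + 1)), best)
          (curRest, nxt, best)
          ⟨rfl, rfl, fun p hp => hcur p (List.mem_cons_of_mem _ hp), hnxt⟩
        obtain ⟨e1, e2, e3, e4⟩ := hrel
        rw [e1, e2]
        exact ih _ _ _ _ e3 e4
    | nil =>
      cases hn : nxt.reverse with
      | nil =>
        have : nxt = [] := by simpa using congrArg List.reverse hn
        subst this
        rfl
      | cons p t =>
        obtain ⟨r, c⟩ := p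
        have hnxtne : nxt ≠ [] := by
          intro hcon; rw [hcon] at hn; simp at hn
        have hmem : ∀ x ∈ (r, c) :: t, pvInb rows cols x := by
          intro x hx
          exact hnxt x (by rw [← List.mem_reverse, hn]; exact hx)
        have hrc := hmem (r, c) List.mem_cons_self
        have hA : solveLoop grid rows cols (fuel + 1)
            (([] : List (Int × Int)).map (pvExt level) ++ ((r, c) :: t).map (pvExt (level + 1))) best
            = if r = rows - 1 ∧ c = cols - 1 then level + 1
              else
                let st := solveDirections.keys.foldl (solveBody grid rows cols r c (level + 1))
                  (t.map (pvExt (level + 1)), best)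
                solveLoop grid rows cols fuel st.1 st.2 := by
          simp [pvExt, solveLoop]
        have hB : pvLLoop grid rows cols (fuel + 1) [] nxt level best
            = if r = rows - 1 ∧ c = cols - 1 then level + 1
              else
                let st := pvLDirs.foldl (pvLBody grid rows cols r c (level + 1))
                  (t, [], best)
                pvLLoop grid rows cols fuel st.1 st.2.1 (level + 1) st.2.2 := by
          simp only [pvLLoop, hnxtne, and_false, if_false, hn]
          rfl
        rw [hA, hB]
        by_cases htgt : r = rows - 1 ∧ c = cols - 1
        · simp [htgt]
        · simp only [if_neg htgt]
          have hrel := pvFold_rel grid rows cols r c (level + 1) hrc.1 hrc.2.1 hrc.2.2.1 hrc.2.2.2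
            (t.map (pvExt (level + 1)), best) (t, [], best)
            ⟨by simp, rfl, fun x hx => hmem x (List.mem_cons_of_mem _ hx), by simp⟩
          obtain ⟨e1, e2, e3, e4⟩ := hrel
          rw [e1, e2]
          exact ih _ _ _ _ e3 e4

lemma pvA_eq_L (grid : List (List Int)) (hpre : Pre_solve grid) : solve grid = pvLRun grid := by
  obtain ⟨hrows, hcols, _⟩ := hpre
  cases grid with
  | nil => simp at hrows
  | cons row0 rest =>
    show solve (row0 :: rest) = pvLRun (row0 :: rest)
    unfold solve pvLRun
    simp only [PySem.List.pyGetD_zero_cons]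
    have hcols' : (0 : Int) < (row0.length : Int) := by
      simp only [List.headD_cons] at hcols
      exact_mod_cast hcols
    have hrows' : (0 : Int) < (((row0 :: rest).length : Nat) : Int) := by
      simp only [List.length_cons]
      push_cast
      omega
    have h := pvLoop_rel (row0 :: rest) ((row0 :: rest).length : Int) (row0.length : Int)
      (solveFuel ((row0 :: rest).length : Int) (row0.length : Int)) [(0, 0)] [] 0
      (PySem.Dict.ofList [((0, 0), 0)])
      (by
        intro p hp
        rcases List.mem_cons.mp hp with rfl | hcon
        · exact ⟨le_refl 0, hrows', le_refl 0, hcols'⟩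
        · cases hcon)
      (by intro p hp; cases hp)
    simpa [pvExt] using h


-- ---------- invariant of the L machine ----------

def pvRelaxed (grid : List (List Int)) (rows cols : Int) (D : PySem.Dict (Int × Int) Int)
    (v : Int × Int) : Prop :=
  ∃ dv, D.get? v = some dv ∧ ∀ d ∈ pvDirsL, pvInb rows cols (pvMv d v) →
    ∃ w, D.get? (pvMv d v) = some w ∧ w ≤ dv + pvWt grid v d

structure pvInv (grid : List (List Int)) (rows cols : Int)
    (cur nxt : List (Int × Int)) (lvl : Int) (D : PySem.Dict (Int × Int) Int) : Prop where
  sound : ∀ p k, D.get? p = some k → pvReach grid rows cols k p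
  zero : D.get? (0, 0) = some 0
  qcur : ∀ p ∈ cur, ∃ dp, D.get? p = some dp ∧ dp ≤ lvl ∧
    (dp < lvl → pvRelaxed grid rows cols D p)
  qnxt : ∀ p ∈ nxt, ∃ dp, D.get? p = some dp ∧ dp ≤ lvl + 1
  rcd : ∀ p dp, D.get? p = some dp → (p ∈ cur ∧ dp = lvl) ∨ (p ∈ nxt ∧ dp = lvl + 1) ∨
    pvRelaxed grid rows cols D p
  tgtf : ∀ dt, D.get? (rows - 1, cols - 1) = some dt →
    ((rows - 1, cols - 1) ∈ cur ∧ dt = lvl) ∨ ((rows - 1, cols - 1) ∈ nxt ∧ dt = lvl + 1)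
  vb : ∀ p dp, D.get? p = some dp → 0 ≤ dp ∧ dp ≤ lvl + 1
  lb : ∀ j, pvReach grid rows cols j (rows - 1, cols - 1) → lvl ≤ j
  l0 : 0 ≤ lvl
  inb : ∀ p dp, D.get? p = some dp → pvInb rows cols p

lemma pvPeel {grid : List (List Int)} {rows cols : Int} {cur nxt : List (Int × Int)}
    {lvl : Int} {D : PySem.Dict (Int × Int) Int}
    (I : pvInv grid rows cols cur nxt lvl D) :
    ∀ u c, pvRF grid rows cols u c (rows - 1, cols - 1) →
      ∀ du, D.get? u = some du → ∀ j, du + c ≤ j →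
      (∃ dt, D.get? (rows - 1, cols - 1) = some dt ∧ dt ≤ j) ∨
        (lvl ≤ j ∧ cur ≠ []) ∨ (lvl + 1 ≤ j ∧ nxt ≠ []) := by
  suffices h : ∀ u c (v : Int × Int), pvRF grid rows cols u c v → v = (rows - 1, cols - 1) →
      ∀ du, D.get? u = some du → ∀ j, du + c ≤ j →
      (∃ dt, D.get? (rows - 1, cols - 1) = some dt ∧ dt ≤ j) ∨
        (lvl ≤ j ∧ cur ≠ []) ∨ (lvl + 1 ≤ j ∧ nxt ≠ []) by
    intro u c hrf
    exact h u c _ hrf rfl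
  intro u c v hrf
  induction hrf with
  | refl u =>
      intro heq du hdu j hj
      subst heq
      exact Or.inl ⟨du, hdu, by omega⟩
  | @cons u' c' v' d hd hin hsub ih =>
      intro heq du hdu j hj
      subst heq
      have hc' : 0 ≤ c' := pvRF_nonneg hsub
      have hwt := pvWt_nonneg grid u' d
      rcases I.rcd u' du hdu with ⟨hmem, rfl⟩ | ⟨hmem, rfl⟩ | ⟨dv, hdv, hrel⟩
      · exact Or.inr (Or.inl ⟨by omega, List.ne_nil_of_mem hmem⟩)
      · exact Or.inr (Or.inr ⟨by omega, List.ne_nil_of_mem hmem⟩)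
      · have hdv' : dv = du := by rw [hdu] at hdv; exact (Option.some.inj hdv).symm
        subst hdv'
        obtain ⟨w, hw, hwle⟩ := hrel d hd hin
        exact ih rfl w hw j (by omega)

lemma pvInv_swap {grid : List (List Int)} {rows cols : Int} {nxt : List (Int × Int)}
    {lvl : Int} {D : PySem.Dict (Int × Int) Int}
    (I : pvInv grid rows cols [] nxt lvl D) :
    pvInv grid rows cols nxt.reverse [] (lvl + 1) D := by
  refine ⟨I.sound, I.zero, ?_, ?_, ?_, ?_, ?_, ?_, by have := I.l0; omega, I.inb⟩
  · intro p hp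
    have hp' : p ∈ nxt := List.mem_reverse.mp hp
    obtain ⟨dp, hdp, hle⟩ := I.qnxt p hp'
    refine ⟨dp, hdp, hle, ?_⟩
    intro hlt
    rcases I.rcd p dp hdp with ⟨hmem, _⟩ | ⟨_, rfl⟩ | hrel
    · cases hmem
    · omega
    · exact hrel
  · intro p hp; cases hp
  · intro p dp hdp
    rcases I.rcd p dp hdp with ⟨hmem, _⟩ | ⟨hmem, rfl⟩ | hrel
    · cases hmem
    · exact Or.inl ⟨List.mem_reverse.mpr hmem, rfl⟩
    · exact Or.inr (Or.inr hrel)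
  · intro dt hdt
    rcases I.tgtf dt hdt with ⟨hmem, _⟩ | ⟨hmem, rfl⟩
    · cases hmem
    · exact Or.inl ⟨List.mem_reverse.mpr hmem, rfl⟩
  · intro p dp hdp
    have := I.vb p dp hdp
    omega
  · intro j hj
    have hrf := pvReach_iff_RF.mp hj
    have := pvPeel I (0, 0) j hrf 0 I.zero j (by omega)
    rcases this with ⟨dt, hdt, hle⟩ | ⟨_, hne⟩ | ⟨hle, _⟩
    · rcases I.tgtf dt hdt with ⟨hmem, _⟩ | ⟨_, rfl⟩
      · cases hmem
      · omega
    · exact absurd rfl hne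
    · exact hle

-- ---------- effect of one fresh pop on the invariant ----------


def pvPush (cur nxt : List (Int × Int)) (D : PySem.Dict (Int × Int) Int)
    (w : Int × Int) (lvl nc : Int) :
    List (Int × Int) × List (Int × Int) × PySem.Dict (Int × Int) Int :=
  if nc = lvl then (w :: cur, nxt, D.insert w nc) else (cur, w :: nxt, D.insert w nc)

lemma pvLBody_eq (grid : List (List Int)) (rows cols lvl a b : Int)
    (cur nxt : List (Int × Int)) (D : PySem.Dict (Int × Int) Int) (d dr dc : Int) :
    pvLBody grid rows cols a b lvl (cur, nxt, D) (d, dr, dc) =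
      (if 0 ≤ a + dr ∧ a + dr < rows ∧ 0 ≤ b + dc ∧ b + dc < cols then
        (match D.get? (a + dr, b + dc) with
         | none => pvPush cur nxt D (a + dr, b + dc) lvl
            (if d = PySem.List.pyGetD (PySem.List.pyGetD grid a []) b 0 then lvl else lvl + 1)
         | some bb =>
            if (if d = PySem.List.pyGetD (PySem.List.pyGetD grid a []) b 0 then lvl
                else lvl + 1) < bb then
              pvPush cur nxt D (a + dr, b + dc) lvl
                (if d = PySem.List.pyGetD (PySem.List.pyGetD grid a []) b 0 then lvl else lvl + 1)
            else (cur, nxt, D))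
      else (cur, nxt, D)) := by
  by_cases hb : 0 ≤ a + dr ∧ a + dr < rows ∧ 0 ≤ b + dc ∧ b + dc < cols
  · cases hg : D.get? (a + dr, b + dc) with
    | none => simp [pvLBody, hb, hg, pvPush]
    | some bb =>
        by_cases hlt : (if d = PySem.List.pyGetD (PySem.List.pyGetD grid a []) b 0 then lvl
            else lvl + 1) < bb
        · simp [pvLBody, hb, hg, hlt, pvPush]
        · simp [pvLBody, hb, hg, hlt]
  · simp [pvLBody, hb]

-- the fold state during a fresh pop of v: all invariant clauses with v exempted
-- from the queued-or-relaxed clause, and v's own entry pinned at lvl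
def pvMid (grid : List (List Int)) (rows cols lvl : Int) (v : Int × Int)
    (st : List (Int × Int) × List (Int × Int) × PySem.Dict (Int × Int) Int) : Prop :=
  (∀ p k, st.2.2.get? p = some k → pvReach grid rows cols k p) ∧
  st.2.2.get? (0, 0) = some 0 ∧
  (∀ p ∈ st.1, ∃ dp, st.2.2.get? p = some dp ∧ dp ≤ lvl ∧
    (dp < lvl → pvRelaxed grid rows cols st.2.2 p)) ∧
  (∀ p ∈ st.2.1, ∃ dp, st.2.2.get? p = some dp ∧ dp ≤ lvl + 1) ∧
  (∀ p dp, st.2.2.get? p = some dp → p = v ∨ (p ∈ st.1 ∧ dp = lvl) ∨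
    (p ∈ st.2.1 ∧ dp = lvl + 1) ∨ pvRelaxed grid rows cols st.2.2 p) ∧
  (∀ dt, st.2.2.get? (rows - 1, cols - 1) = some dt →
    ((rows - 1, cols - 1) ∈ st.1 ∧ dt = lvl) ∨ ((rows - 1, cols - 1) ∈ st.2.1 ∧ dt = lvl + 1)) ∧
  (∀ p dp, st.2.2.get? p = some dp → 0 ≤ dp ∧ dp ≤ lvl + 1) ∧
  (∀ p dp, st.2.2.get? p = some dp → pvInb rows cols p) ∧
  st.2.2.get? v = some lvl

def pvRelOn (grid : List (List Int)) (rows cols lvl : Int) (D : PySem.Dict (Int × Int) Int)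
    (v : Int × Int) (ds : List Int) : Prop :=
  ∀ d ∈ ds, pvInb rows cols (pvMv d v) →
    ∃ w, D.get? (pvMv d v) = some w ∧ w ≤ lvl + pvWt grid v d

lemma pvRelaxed_insert {grid : List (List Int)} {rows cols : Int}
    {D : PySem.Dict (Int × Int) Int} {p w : Int × Int} {nv : Int}
    (h : pvRelaxed grid rows cols D p) (hpw : p ≠ w)
    (hcase : ∀ bb, D.get? w = some bb → nv ≤ bb) :
    pvRelaxed grid rows cols (D.insert w nv) p := by
  obtain ⟨dv, hdv, hrel⟩ := h
  refine ⟨dv, ?_, ?_⟩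
  · rw [PySem.Dict.get?_insert, if_neg hpw]; exact hdv
  · intro d hd hin
    obtain ⟨ww, hww, hwle⟩ := hrel d hd hin
    by_cases hq : pvMv d p = w
    · refine ⟨nv, ?_, ?_⟩
      · rw [PySem.Dict.get?_insert, if_pos hq]
      · rw [hq] at hww
        have := hcase ww hww
        omega
    · exact ⟨ww, by rw [PySem.Dict.get?_insert, if_neg hq]; exact hww, hwle⟩

lemma pvLStep_fresh {grid : List (List Int)} {rows cols lvl : Int} {v : Int × Int}
    {st : List (Int × Int) × List (Int × Int) × PySem.Dict (Int × Int) Int} {done : List Int}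
    (hl0 : 0 ≤ lvl)
    (hM : pvMid grid rows cols lvl v st) (hR : pvRelOn grid rows cols lvl st.2.2 v done)
    (d dr dc : Int) (hd : d ∈ pvDirsL) (hmv : pvMv d v = (v.1 + dr, v.2 + dc))
    (hdd : ¬ (dr = 0 ∧ dc = 0)) :
    pvMid grid rows cols lvl v (pvLBody grid rows cols v.1 v.2 lvl st (d, dr, dc)) ∧
    pvRelOn grid rows cols lvl (pvLBody grid rows cols v.1 v.2 lvl st (d, dr, dc)).2.2 v
      (d :: done) := by
  obtain ⟨cur, nxt, D⟩ := st
  obtain ⟨hsound, hzero, hqcur, hqnxt, hrcd, htgtf, hvb, hinbb, hvfix⟩ := hM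
  simp only at hsound hzero hqcur hqnxt hrcd htgtf hvb hinbb hvfix hR
  rw [pvLBody_eq]
  have hwtsplit := pvWt_nonneg grid v d
  have hnc : (if d = PySem.List.pyGetD (PySem.List.pyGetD grid v.1 []) v.2 0 then lvl
      else lvl + 1) = lvl + pvWt grid v d := by
    unfold pvWt pvCell
    split_ifs <;> omega
  by_cases hinb : 0 ≤ v.1 + dr ∧ v.1 + dr < rows ∧ 0 ≤ v.2 + dc ∧ v.2 + dc < cols
  · rw [if_pos hinb]
    have hinb' : pvInb rows cols (pvMv d v) := by rw [hmv]; exact hinb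
    have hvw : v ≠ (v.1 + dr, v.2 + dc) := by
      intro hcon
      have h1 : v.1 = v.1 + dr := by simpa using congrArg Prod.fst hcon
      have h2 : v.2 = v.2 + dc := by simpa using congrArg Prod.snd hcon
      exact hdd ⟨by omega, by omega⟩
    -- the push outcome satisfies everything
    have hpush : ∀ (hok : ∀ bb, D.get? (v.1 + dr, v.2 + dc) = some bb →
          lvl + pvWt grid v d < bb),
        pvMid grid rows cols lvl v
          (pvPush cur nxt D (v.1 + dr, v.2 + dc) lvl (lvl + pvWt grid v d)) ∧
        pvRelOn grid rows cols lvl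
          (pvPush cur nxt D (v.1 + dr, v.2 + dc) lvl (lvl + pvWt grid v d)).2.2 v
          (d :: done) := by
      intro hok
      set w := (v.1 + dr, v.2 + dc) with hwdef
      set nv := lvl + pvWt grid v d with hnvdef
      have hDins : ∀ (p : Int × Int), (D.insert w nv).get? p =
          if p = w then some nv else D.get? p := fun p => PySem.Dict.get?_insert D w p nv
      have hkeep : ∀ p (dp : Int), p ≠ w → ((D.insert w nv).get? p = some dp ↔
          D.get? p = some dp) := by
        intro p dp hne
        rw [hDins, if_neg hne]
      have hMparts : ∀ (cur' nxt' : List (Int × Int)),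
          (w ∈ cur' ∧ nv = lvl ∨ w ∈ nxt' ∧ nv = lvl + 1) →
          (∀ p, p ∈ cur' ↔ p = w ∧ nv = lvl ∨ p ∈ cur) →
          (∀ p, p ∈ nxt' ↔ p = w ∧ nv = lvl + 1 ∨ p ∈ nxt) →
          pvMid grid rows cols lvl v (cur', nxt', D.insert w nv) := by
        intro cur' nxt' hwmem hcur' hnxt'
        refine ⟨?_, ?_, ?_, ?_, ?_, ?_, ?_, ?_, ?_⟩
        · -- sound
          intro p k hp
          rw [hDins] at hp
          split_ifs at hp with hpw
          · subst hpw
            have hknv : k = nv := (Option.some.inj hp).symm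
            subst hknv
            have hreach := hsound v lvl hvfix
            have := pvReach.step d hreach hd hinb'
            rw [hmv] at this
            exact this
          · exact hsound p k hp
        · -- zero
          have hz : (0, 0) ≠ w := by
            intro hcon
            rw [← hcon] at hok
            have := hok 0 hzero
            omega
          rw [hDins, if_neg hz]
          exact hzero
        · -- qcur
          intro p hp
          rcases (hcur' p).mp hp with ⟨rfl, hnv⟩ | hp'
          · exact ⟨nv, by rw [hDins, if_pos rfl], by omega, by omega⟩
          · obtain ⟨dp, hdp, hle, hrel⟩ := hqcur p hp'
            by_cases hpw : p = w
            · subst hpw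
              have := hok dp hdp
              refine ⟨nv, by rw [hDins, if_pos rfl], by omega, ?_⟩
              intro hlt
              omega
            · refine ⟨dp, (hkeep p dp hpw).mpr hdp, hle, ?_⟩
              intro hlt
              exact pvRelaxed_insert (hrel hlt) hpw (fun bb hbb => le_of_lt (hok bb hbb))
        · -- qnxt
          intro p hp
          rcases (hnxt' p).mp hp with ⟨rfl, hnv⟩ | hp'
          · exact ⟨nv, by rw [hDins, if_pos rfl], by omega⟩
          · obtain ⟨dp, hdp, hle⟩ := hqnxt p hp'
            by_cases hpw : p = w
            · subst hpw
              exact ⟨nv, by rw [hDins, if_pos rfl], by omega⟩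
            · exact ⟨dp, (hkeep p dp hpw).mpr hdp, hle⟩
        · -- rcd
          intro p dp hp
          rw [hDins] at hp
          split_ifs at hp with hpw
          · subst hpw
            have hdpnv : dp = nv := (Option.some.inj hp).symm
            subst hdpnv
            rcases hwmem with ⟨hm, he⟩ | ⟨hm, he⟩
            · exact Or.inr (Or.inl ⟨hm, he⟩)
            · exact Or.inr (Or.inr (Or.inl ⟨hm, he⟩))
          · rcases hrcd p dp hp with hpv | ⟨hm, he⟩ | ⟨hm, he⟩ | hrel
            · exact Or.inl hpv
            · exact Or.inr (Or.inl ⟨(hcur' p).mpr (Or.inr hm), he⟩)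
            · exact Or.inr (Or.inr (Or.inl ⟨(hnxt' p).mpr (Or.inr hm), he⟩))
            · exact Or.inr (Or.inr (Or.inr (pvRelaxed_insert hrel hpw (fun bb hbb => le_of_lt (hok bb hbb)))))
        · -- tgtf
          intro dt hp
          rw [hDins] at hp
          split_ifs at hp with hpw
          · have hdtnv : dt = nv := (Option.some.inj hp).symm
            subst hdtnv
            rcases hwmem with ⟨hm, he⟩ | ⟨hm, he⟩
            · exact Or.inl ⟨by rw [hpw]; exact hm, he⟩
            · exact Or.inr ⟨by rw [hpw]; exact hm, he⟩
          · rcases htgtf dt hp with ⟨hm, he⟩ | ⟨hm, he⟩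
            · exact Or.inl ⟨(hcur' _).mpr (Or.inr hm), he⟩
            · exact Or.inr ⟨(hnxt' _).mpr (Or.inr hm), he⟩
        · -- vb
          intro p dp hp
          rw [hDins] at hp
          split_ifs at hp with hpw
          · have : dp = nv := (Option.some.inj hp).symm
            omega
          · exact hvb p dp hp
        · -- inb
          intro p dp hp
          rw [hDins] at hp
          split_ifs at hp with hpw
          · subst hpw
            rw [← hmv]
            exact hinb'
          · exact hinbb p dp hp
        · -- vfix
          rw [hDins, if_neg hvw]
          exact hvfix
      have hRel' : pvRelOn grid rows cols lvl (D.insert w nv) v (d :: done) := by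
        intro d' hd' hin'
        rcases List.mem_cons.mp hd' with rfl | hd'
        · refine ⟨nv, ?_, le_refl _⟩
          rw [hmv, hDins, if_pos rfl]
        · obtain ⟨ww, hww, hwle⟩ := hR d' hd' hin'
          by_cases hq : pvMv d' v = w
          · refine ⟨nv, by rw [hq, hDins, if_pos rfl], ?_⟩
            rw [hq] at hww
            have := hok ww hww
            omega
          · exact ⟨ww, by rw [hDins, if_neg hq]; exact hww, hwle⟩
      unfold pvPush
      rcases hwtsplit with ⟨hwt0, hwt1⟩
      by_cases hnv0 : nv = lvl
      · rw [if_pos hnv0]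
        exact ⟨hMparts _ _ (Or.inl ⟨List.mem_cons_self, hnv0⟩)
          (fun p => by
            constructor
            · intro hp
              rcases List.mem_cons.mp hp with rfl | hp
              · exact Or.inl ⟨rfl, hnv0⟩
              · exact Or.inr hp
            · intro hp
              rcases hp with ⟨rfl, _⟩ | hp
              · exact List.mem_cons_self
              · exact List.mem_cons_of_mem _ hp)
          (fun p => by
            constructor
            · intro hp; exact Or.inr hp
            · intro hp
              rcases hp with ⟨rfl, he⟩ | hp
              · omega
              · exact hp), hRel'⟩
      · rw [if_neg hnv0]
        have hnv1 : nv = lvl + 1 := by omega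
        exact ⟨hMparts _ _ (Or.inr ⟨List.mem_cons_self, hnv1⟩)
          (fun p => by
            constructor
            · intro hp; exact Or.inr hp
            · intro hp
              rcases hp with ⟨rfl, he⟩ | hp
              · omega
              · exact hp)
          (fun p => by
            constructor
            · intro hp
              rcases List.mem_cons.mp hp with rfl | hp
              · exact Or.inl ⟨rfl, hnv1⟩
              · exact Or.inr hp
            · intro hp
              rcases hp with ⟨rfl, _⟩ | hp
              · exact List.mem_cons_self
              · exact List.mem_cons_of_mem _ hp), hRel'⟩
    rw [hnc]
    cases hg : D.get? (v.1 + dr, v.2 + dc) with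
    | none =>
        simp only [hg]
        exact hpush (by intro bb hbb; rw [hbb] at hg; cases hg)
    | some bb =>
        simp only [hg]
        by_cases hlt : lvl + pvWt grid v d < bb
        · rw [if_pos hlt]
          exact hpush (by
            intro bb' hbb'
            rw [hbb'] at hg
            have : bb' = bb := Option.some.inj hg
            omega)
        · rw [if_neg hlt]
          refine ⟨⟨hsound, hzero, hqcur, hqnxt, hrcd, htgtf, hvb, hinbb, hvfix⟩, ?_⟩
          intro d' hd' hin'
          rcases List.mem_cons.mp hd' with rfl | hd'
          · refine ⟨bb, ?_, by omega⟩
            rw [hmv]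
            exact hg
          · exact hR d' hd' hin'
  · rw [if_neg hinb]
    refine ⟨⟨hsound, hzero, hqcur, hqnxt, hrcd, htgtf, hvb, hinbb, hvfix⟩, ?_⟩
    intro d' hd' hin'
    rcases List.mem_cons.mp hd' with rfl | hd'
    · rw [hmv] at hin'
      exact absurd hin' (by simpa [pvInb] using hinb)
    · exact hR d' hd' hin'

lemma pvLBody_stale {grid : List (List Int)} {rows cols lvl dv : Int} {v : Int × Int}
    {cur nxt : List (Int × Int)} {D : PySem.Dict (Int × Int) Int}
    (hdv : D.get? v = some dv) (hlt : dv < lvl) (hrel : pvRelaxed grid rows cols D v)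
    (d dr dc : Int) (hd : d ∈ pvDirsL) (hmv : pvMv d v = (v.1 + dr, v.2 + dc)) :
    pvLBody grid rows cols v.1 v.2 lvl (cur, nxt, D) (d, dr, dc) = (cur, nxt, D) := by
  rw [pvLBody_eq]
  have hnc : (if d = PySem.List.pyGetD (PySem.List.pyGetD grid v.1 []) v.2 0 then lvl
      else lvl + 1) = lvl + pvWt grid v d := by
    unfold pvWt pvCell
    split_ifs <;> omega
  by_cases hinb : 0 ≤ v.1 + dr ∧ v.1 + dr < rows ∧ 0 ≤ v.2 + dc ∧ v.2 + dc < cols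
  · rw [if_pos hinb]
    have hinb' : pvInb rows cols (pvMv d v) := by rw [hmv]; exact hinb
    obtain ⟨dv', hdv', hrel'⟩ := hrel
    have hdveq : dv' = dv := by rw [hdv] at hdv'; exact (Option.some.inj hdv').symm
    subst hdveq
    obtain ⟨ww, hww, hwle⟩ := hrel' d hd hinb'
    rw [hmv] at hww
    rw [hnc]
    simp only [hww]
    have hnlt : ¬ (lvl + pvWt grid v d < ww) := by omega
    rw [if_neg hnlt]
  · rw [if_neg hinb]

lemma pvLFold_fresh {grid : List (List Int)} {rows cols lvl : Int} {v : Int × Int}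
    {rest nxt : List (Int × Int)} {D : PySem.Dict (Int × Int) Int}
    (I : pvInv grid rows cols (v :: rest) nxt lvl D) (hget : D.get? v = some lvl)
    (hvtgt : v ≠ (rows - 1, cols - 1)) :
    pvInv grid rows cols
      (pvLDirs.foldl (pvLBody grid rows cols v.1 v.2 lvl) (rest, nxt, D)).1
      (pvLDirs.foldl (pvLBody grid rows cols v.1 v.2 lvl) (rest, nxt, D)).2.1
      lvl
      (pvLDirs.foldl (pvLBody grid rows cols v.1 v.2 lvl) (rest, nxt, D)).2.2 := by
  have hM0 : pvMid grid rows cols lvl v (rest, nxt, D) := by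
    refine ⟨I.sound, I.zero, ?_, I.qnxt, ?_, ?_, I.vb, I.inb, hget⟩
    · intro p hp
      exact I.qcur p (List.mem_cons_of_mem _ hp)
    · intro p dp hp
      by_cases hpv : p = v
      · exact Or.inl hpv
      · rcases I.rcd p dp hp with ⟨hm, he⟩ | ⟨hm, he⟩ | hrel
        · rcases List.mem_cons.mp hm with rfl | hm
          · exact absurd rfl hpv
          · exact Or.inr (Or.inl ⟨hm, he⟩)
        · exact Or.inr (Or.inr (Or.inl ⟨hm, he⟩))
        · exact Or.inr (Or.inr (Or.inr hrel))
    · intro dt hdt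
      rcases I.tgtf dt hdt with ⟨hm, he⟩ | ⟨hm, he⟩
      · rcases List.mem_cons.mp hm with hveq | hm
        · exact absurd hveq.symm hvtgt
        · exact Or.inl ⟨hm, he⟩
      · exact Or.inr ⟨hm, he⟩
  have hR0 : pvRelOn grid rows cols lvl D v [] := by
    intro d hd
    cases hd
  have hl0 := I.l0
  simp only [pvLDirs, List.foldl_cons, List.foldl_nil]
  have s1 := pvLStep_fresh hl0 hM0 hR0 1 0 1 (by simp [pvDirsL])
    (by simp [pvMv, Prod.ext_iff] <;> omega) (by simp)
  have s2 := pvLStep_fresh hl0 s1.1 s1.2 2 0 (-1) (by simp [pvDirsL])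
    (by simp [pvMv, Prod.ext_iff] <;> omega) (by simp)
  have s3 := pvLStep_fresh hl0 s2.1 s2.2 3 1 0 (by simp [pvDirsL])
    (by simp [pvMv, Prod.ext_iff] <;> omega) (by simp)
  have s4 := pvLStep_fresh hl0 s3.1 s3.2 4 (-1) 0 (by simp [pvDirsL])
    (by simp [pvMv, Prod.ext_iff] <;> omega) (by simp)
  obtain ⟨hsound, hzero, hqcur, hqnxt, hrcd, htgtf, hvb, hinbb, hvfix⟩ := s4.1
  have hRel := s4.2
  have hrelv : pvRelaxed grid rows cols
      (pvLBody grid rows cols v.1 v.2 lvl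
        (pvLBody grid rows cols v.1 v.2 lvl
          (pvLBody grid rows cols v.1 v.2 lvl
            (pvLBody grid rows cols v.1 v.2 lvl (rest, nxt, D) (1, 0, 1)) (2, 0, -1))
          (3, 1, 0)) (4, -1, 0)).2.2 v := by
    refine ⟨lvl, hvfix, ?_⟩
    intro d hd hin
    have hd' : d ∈ ([4, 3, 2, 1] : List Int) := by
      simp only [pvDirsL, List.mem_cons, List.not_mem_nil, or_false] at hd
      rcases hd with rfl | rfl | rfl | rfl <;> simp
    exact hRel d hd' hin
  refine ⟨hsound, hzero, hqcur, hqnxt, ?_, htgtf, hvb, I.lb, I.l0, hinbb⟩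
  intro p dp hp
  rcases hrcd p dp hp with rfl | ⟨hm, he⟩ | ⟨hm, he⟩ | hrel
  · exact Or.inr (Or.inr hrelv)
  · exact Or.inl ⟨hm, he⟩
  · exact Or.inr (Or.inl ⟨hm, he⟩)
  · exact Or.inr (Or.inr hrel)

lemma pvLFold_stale {grid : List (List Int)} {rows cols lvl dv : Int} {v : Int × Int}
    {rest nxt : List (Int × Int)} {D : PySem.Dict (Int × Int) Int}
    (hdv : D.get? v = some dv) (hlt : dv < lvl) (hrel : pvRelaxed grid rows cols D v) :
    pvLDirs.foldl (pvLBody grid rows cols v.1 v.2 lvl) (rest, nxt, D) = (rest, nxt, D) := by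
  simp only [pvLDirs, List.foldl_cons, List.foldl_nil]
  rw [pvLBody_stale hdv hlt hrel 1 0 1 (by simp [pvDirsL]) (by simp [pvMv, Prod.ext_iff] <;> omega),
    pvLBody_stale hdv hlt hrel 2 0 (-1) (by simp [pvDirsL]) (by simp [pvMv, Prod.ext_iff] <;> omega),
    pvLBody_stale hdv hlt hrel 3 1 0 (by simp [pvDirsL]) (by simp [pvMv, Prod.ext_iff] <;> omega),
    pvLBody_stale hdv hlt hrel 4 (-1) 0 (by simp [pvDirsL]) (by simp [pvMv, Prod.ext_iff] <;> omega)]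

-- ---------- termination potential ----------

noncomputable def pvCellsF (rows cols : Int) : Finset (Int × Int) :=
  Finset.Icc 0 (rows - 1) ×ˢ Finset.Icc 0 (cols - 1)

lemma pvMem_cellsF {rows cols : Int} {p : Int × Int} :
    p ∈ pvCellsF rows cols ↔ pvInb rows cols p := by
  obtain ⟨a, b⟩ := p
  simp only [pvCellsF, Finset.mem_product, Finset.mem_Icc, pvInb]
  omega

def pvCredit (mx : Nat) (D : PySem.Dict (Int × Int) Int) (p : Int × Int) : Nat :=
  match D.get? p with
  | none => mx + 1
  | some k => k.toNat

noncomputable def pvPhi (rows cols : Int) (mx : Nat) (D : PySem.Dict (Int × Int) Int) : Nat :=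
  (pvCellsF rows cols).sum (pvCredit mx D)

noncomputable def pvPhiSt (rows cols : Int) (mx : Nat)
    (st : List (Int × Int) × List (Int × Int) × PySem.Dict (Int × Int) Int) : Nat :=
  pvPhi rows cols mx st.2.2 + st.1.length + st.2.1.length

lemma pvPhi_insert_lt {rows cols : Int} {mx : Nat} {D : PySem.Dict (Int × Int) Int}
    {w : Int × Int} {nv : Int} (hw : pvInb rows cols w) (h0 : 0 ≤ nv)
    (hmx : nv.toNat ≤ mx) (hold : ∀ bb, D.get? w = some bb → nv < bb) :
    pvPhi rows cols mx (D.insert w nv) < pvPhi rows cols mx D := by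
  have hcred : ∀ p, pvCredit mx (D.insert w nv) p ≤ pvCredit mx D p := by
    intro p
    unfold pvCredit
    rw [PySem.Dict.get?_insert]
    split_ifs with hpw
    · subst hpw
      cases hg : D.get? p with
      | none => simp; omega
      | some bb =>
          have := hold bb hg
          simp only
          omega
    · exact le_refl _
  have hstrict : pvCredit mx (D.insert w nv) w < pvCredit mx D w := by
    unfold pvCredit
    rw [PySem.Dict.get?_insert, if_pos rfl]
    cases hg : D.get? w with
    | none => simp; omega
    | some bb =>
        have := hold bb hg
        simp only
        omega
  exact Finset.sum_lt_sum (fun i _ => hcred i) ⟨w, pvMem_cellsF.mpr hw, hstrict⟩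

lemma pvLBody_phiSt {grid : List (List Int)} {rows cols lvl : Int} {mx : Nat}
    (hl0 : 0 ≤ lvl) (hmx : lvl + 1 ≤ (mx : Int)) (a b : Int)
    (st : List (Int × Int) × List (Int × Int) × PySem.Dict (Int × Int) Int) (d dr dc : Int) :
    pvPhiSt rows cols mx (pvLBody grid rows cols a b lvl st (d, dr, dc)) ≤
      pvPhiSt rows cols mx st := by
  obtain ⟨cur, nxt, D⟩ := st
  rw [pvLBody_eq]
  set nc := (if d = PySem.List.pyGetD (PySem.List.pyGetD grid a []) b 0 then lvl
    else lvl + 1) with hncdef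
  have hnc0 : 0 ≤ nc := by rw [hncdef]; split_ifs <;> omega
  have hncmx : nc.toNat ≤ mx := by rw [hncdef]; split_ifs <;> omega
  by_cases hb : 0 ≤ a + dr ∧ a + dr < rows ∧ 0 ≤ b + dc ∧ b + dc < cols
  · rw [if_pos hb]
    have hwinb : pvInb rows cols (a + dr, b + dc) := hb
    have hpush : ∀ (hold : ∀ bb, D.get? (a + dr, b + dc) = some bb → nc < bb),
        pvPhiSt rows cols mx (pvPush cur nxt D (a + dr, b + dc) lvl nc) ≤
        pvPhiSt rows cols mx (cur, nxt, D) := by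
      intro hold
      have hphi := pvPhi_insert_lt (rows := rows) (cols := cols) (mx := mx)
        hwinb hnc0 hncmx hold
      unfold pvPush
      by_cases he : nc = lvl
      · rw [if_pos he]
        simp only [pvPhiSt, List.length_cons]
        omega
      · rw [if_neg he]
        simp only [pvPhiSt, List.length_cons]
        omega
    cases hg : D.get? (a + dr, b + dc) with
    | none =>
        simp only [hg]
        exact hpush (by intro bb hbb; rw [hbb] at hg; cases hg)
    | some bb =>
        simp only [hg]
        by_cases hlt : nc < bb
        · rw [if_pos hlt]
          exact hpush (by
            intro bb' hbb'
            rw [hbb'] at hg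
            have : bb' = bb := Option.some.inj hg
            omega)
        · rw [if_neg hlt]
  · rw [if_neg hb]

lemma pvLFold_phiSt {grid : List (List Int)} {rows cols lvl : Int} {mx : Nat}
    (hl0 : 0 ≤ lvl) (hmx : lvl + 1 ≤ (mx : Int)) (a b : Int)
    (st : List (Int × Int) × List (Int × Int) × PySem.Dict (Int × Int) Int) :
    pvPhiSt rows cols mx (pvLDirs.foldl (pvLBody grid rows cols a b lvl) st) ≤
      pvPhiSt rows cols mx st := by
  simp only [pvLDirs, List.foldl_cons, List.foldl_nil]
  calc pvPhiSt rows cols mx _ ≤ _ := pvLBody_phiSt hl0 hmx a b _ 4 (-1) 0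
  _ ≤ _ := pvLBody_phiSt hl0 hmx a b _ 3 1 0
  _ ≤ _ := pvLBody_phiSt hl0 hmx a b _ 2 0 (-1)
  _ ≤ _ := pvLBody_phiSt hl0 hmx a b st 1 0 1

lemma pvD0_get (p : Int × Int) :
    (PySem.Dict.ofList [((0, 0), (0 : Int))]).get? p = if (0, 0) = p then some 0 else none := by
  show (PySem.Dict.mk [((0, 0), (0 : Int))]).get? p = _
  rw [PySem.Dict.get?_mk_cons]
  split_ifs with h1 <;> simp_all
  rfl

lemma pvL_popstep (grid : List (List Int)) (rows cols dlt : Int)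
    (hdlt : pvIsDelta grid rows cols (rows - 1, cols - 1) dlt)
    (hbound : dlt ≤ rows + cols - 2) (hrc : 2 ≤ rows + cols) (fuel : Nat)
    (ih : ∀ (cur nxt : List (Int × Int)) (lvl : Int) (D : PySem.Dict (Int × Int) Int),
      pvInv grid rows cols cur nxt lvl D →
      pvPhiSt rows cols (rows + cols).toNat (cur, nxt, D) < fuel →
      pvLLoop grid rows cols fuel cur nxt lvl D = dlt)
    (a b : Int) (rest nxt : List (Int × Int)) (lvl : Int) (D : PySem.Dict (Int × Int) Int)
    (I : pvInv grid rows cols ((a, b) :: rest) nxt lvl D)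
    (hphi : pvPhiSt rows cols (rows + cols).toNat ((a, b) :: rest, nxt, D) < fuel + 1) :
    (if a = rows - 1 ∧ b = cols - 1 then lvl
     else
       pvLLoop grid rows cols fuel
         (pvLDirs.foldl (pvLBody grid rows cols a b lvl) (rest, nxt, D)).1
         (pvLDirs.foldl (pvLBody grid rows cols a b lvl) (rest, nxt, D)).2.1 lvl
         (pvLDirs.foldl (pvLBody grid rows cols a b lvl) (rest, nxt, D)).2.2) = dlt := by
  have hmx : lvl + 1 ≤ (((rows + cols).toNat : Nat) : Int) := by
    have h1 : lvl ≤ dlt := I.lb dlt hdlt.1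
    have h2 : (((rows + cols).toNat : Nat) : Int) = rows + cols := Int.toNat_of_nonneg (by omega)
    omega
  obtain ⟨dv, hdv, hle, hstale⟩ := I.qcur (a, b) List.mem_cons_self
  by_cases htgt : a = rows - 1 ∧ b = cols - 1
  · rw [if_pos htgt]
    have hab : ((a : Int), b) = (rows - 1, cols - 1) := by rw [htgt.1, htgt.2]
    rw [hab] at hdv
    have hdveq : dv = lvl := by
      rcases I.tgtf dv hdv with ⟨_, he⟩ | ⟨_, he⟩
      · exact he
      · omega
    have hreach := I.sound _ dv hdv
    have h1 := hdlt.2 dv hreach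
    have h2 := I.lb dlt hdlt.1
    omega
  · rw [if_neg htgt]
    have hvtgt : ((a : Int), b) ≠ (rows - 1, cols - 1) := by
      intro hcon
      exact htgt ⟨by simpa using congrArg Prod.fst hcon, by simpa using congrArg Prod.snd hcon⟩
    by_cases hfresh : dv = lvl
    · rw [hfresh] at hdv
      have I2 := pvLFold_fresh I hdv hvtgt
      have hphi2 : pvPhiSt rows cols (rows + cols).toNat
          (pvLDirs.foldl (pvLBody grid rows cols a b lvl) (rest, nxt, D)) < fuel := by
        have h1 := pvLFold_phiSt (grid := grid) (rows := rows) (cols := cols)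
          I.l0 hmx a b (rest, nxt, D)
        simp only [pvPhiSt, List.length_cons] at hphi h1 ⊢
        omega
      exact ih _ _ _ _ I2 hphi2
    · have hlt : dv < lvl := lt_of_le_of_ne hle hfresh
      have hrel := hstale hlt
      have hfold := pvLFold_stale (rest := rest) (nxt := nxt) hdv hlt hrel
      rw [hfold]
      have I2 : pvInv grid rows cols rest nxt lvl D := by
        refine ⟨I.sound, I.zero, ?_, I.qnxt, ?_, ?_, I.vb, I.lb, I.l0, I.inb⟩
        · intro p hp
          exact I.qcur p (List.mem_cons_of_mem _ hp)
        · intro p dp hp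
          rcases I.rcd p dp hp with ⟨hm, he⟩ | ⟨hm, he⟩ | hr
          · rcases List.mem_cons.mp hm with rfl | hm
            · exact Or.inr (Or.inr hrel)
            · exact Or.inl ⟨hm, he⟩
          · exact Or.inr (Or.inl ⟨hm, he⟩)
          · exact Or.inr (Or.inr hr)
        · intro dt hdt
          rcases I.tgtf dt hdt with ⟨hm, he⟩ | ⟨hm, he⟩
          · rcases List.mem_cons.mp hm with hveq | hm
            · exact absurd hveq.symm hvtgt
            · exact Or.inl ⟨hm, he⟩
          · exact Or.inr ⟨hm, he⟩
      have hphi2 : pvPhiSt rows cols (rows + cols).toNat (rest, nxt, D) < fuel := by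
        simp only [pvPhiSt, List.length_cons] at hphi ⊢
        omega
      exact ih _ _ _ _ I2 hphi2

lemma pvL_main (grid : List (List Int)) (rows cols dlt : Int)
    (hdlt : pvIsDelta grid rows cols (rows - 1, cols - 1) dlt)
    (hbound : dlt ≤ rows + cols - 2) (hrc : 2 ≤ rows + cols) :
    ∀ (fuel : Nat) (cur nxt : List (Int × Int)) (lvl : Int)
      (D : PySem.Dict (Int × Int) Int),
      pvInv grid rows cols cur nxt lvl D →
      pvPhiSt rows cols (rows + cols).toNat (cur, nxt, D) < fuel →
      pvLLoop grid rows cols fuel cur nxt lvl D = dlt := by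
  intro fuel
  induction fuel with
  | zero =>
      intro cur nxt lvl D _ hphi
      omega
  | succ fuel ih =>
      intro cur nxt lvl D I hphi
      by_cases hempty : cur = [] ∧ nxt = []
      · exfalso
        have hrf := pvReach_iff_RF.mp hdlt.1
        rcases pvPeel I (0, 0) dlt hrf 0 I.zero dlt (by omega) with
          ⟨dt, hdt, _⟩ | ⟨_, hne⟩ | ⟨_, hne⟩
        · rcases I.tgtf dt hdt with ⟨hm, _⟩ | ⟨hm, _⟩
          · rw [hempty.1] at hm; cases hm
          · rw [hempty.2] at hm; cases hm
        · exact hne hempty.1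
        · exact hne hempty.2
      · cases cur with
        | cons v rest =>
            obtain ⟨a, b⟩ := v
            have hA : pvLLoop grid rows cols (fuel + 1) ((a, b) :: rest) nxt lvl D
                = if a = rows - 1 ∧ b = cols - 1 then lvl
                  else
                    pvLLoop grid rows cols fuel
                      (pvLDirs.foldl (pvLBody grid rows cols a b lvl) (rest, nxt, D)).1
                      (pvLDirs.foldl (pvLBody grid rows cols a b lvl) (rest, nxt, D)).2.1 lvl
                      (pvLDirs.foldl (pvLBody grid rows cols a b lvl) (rest, nxt, D)).2.2 := by
              simp [pvLLoop]
            rw [hA]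
            exact pvL_popstep grid rows cols dlt hdlt hbound hrc fuel ih a b rest nxt lvl D
              I hphi
        | nil =>
            have hnxt : nxt ≠ [] := fun h => hempty ⟨rfl, h⟩
            cases hrev : nxt.reverse with
            | nil => exact absurd (by simpa using congrArg List.reverse hrev) hnxt
            | cons w ws =>
                obtain ⟨a, b⟩ := w
                have I2 := pvInv_swap I
                rw [hrev] at I2
                have hA : pvLLoop grid rows cols (fuel + 1) [] nxt lvl D
                    = if a = rows - 1 ∧ b = cols - 1 then lvl + 1
                      else
                        pvLLoop grid rows cols fuel
                          (pvLDirs.foldl (pvLBody grid rows cols a b (lvl + 1)) (ws, [], D)).1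
                          (pvLDirs.foldl (pvLBody grid rows cols a b (lvl + 1)) (ws, [], D)).2.1
                          (lvl + 1)
                          (pvLDirs.foldl (pvLBody grid rows cols a b (lvl + 1)) (ws, [], D)).2.2 := by
                  simp only [pvLLoop, hnxt, and_false, if_false, hrev]
                  rfl
                rw [hA]
                have hphi2 : pvPhiSt rows cols (rows + cols).toNat ((a, b) :: ws, [], D) <
                    fuel + 1 := by
                  have hlen : nxt.length = ((a, b) :: ws).length := by
                    rw [← hrev, List.length_reverse]
                  simp only [pvPhiSt, List.length_cons, List.length_nil] at hphi ⊢
                  simp only [List.length_cons] at hlen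
                  omega
                exact pvL_popstep grid rows cols dlt hdlt hbound hrc fuel ih a b ws [] (lvl + 1)
                  D I2 hphi2

lemma pvNat_fuel_ineq (R C : Nat) (hR : 1 ≤ R) (hC : 1 ≤ C) :
    R * C * (R + C + 1) + 1 < (R * C + 2) ^ 3 := by
  have h1 : R + C ≤ R * C + 1 := by nlinarith
  have h2 : R * C * (R + C + 1) ≤ R * C * (R * C + 2) := by
    apply Nat.mul_le_mul_left
    omega
  have h4 : (R * C + 2) ^ 2 ≤ (R * C + 2) ^ 3 := Nat.pow_le_pow_right (by omega) (by omega)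
  have e1 : (R * C + 2) ^ 2 = R * C * (R * C) + 4 * (R * C) + 4 := by ring
  have e2 : R * C * (R * C + 2) = R * C * (R * C) + 2 * (R * C) := by ring
  omega

lemma pvCellsF_card (rows cols : Int) (hr : 0 < rows) (hc : 0 < cols) :
    (pvCellsF rows cols).card = rows.toNat * cols.toNat := by
  rw [pvCellsF, Finset.card_product, Int.card_Icc, Int.card_Icc]
  congr 1 <;> omega

lemma pvPhi_D0_le (rows cols : Int) (mx : Nat) (hr : 0 < rows) (hc : 0 < cols) :
    pvPhi rows cols mx (PySem.Dict.ofList [((0, 0), (0 : Int))]) ≤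
      rows.toNat * cols.toNat * (mx + 1) := by
  rw [← pvCellsF_card rows cols hr hc]
  unfold pvPhi
  rw [← smul_eq_mul, ← Finset.sum_const]
  apply Finset.sum_le_sum
  intro p _
  unfold pvCredit
  rw [pvD0_get]
  by_cases h : ((0, 0) : Int × Int) = p
  · rw [if_pos h]
    simp
  · rw [if_neg h]

lemma pvInv_init (grid : List (List Int)) (rows cols : Int)
    (hr : 0 < rows) (hc : 0 < cols) :
    pvInv grid rows cols [(0, 0)] [] 0 (PySem.Dict.ofList [((0, 0), (0 : Int))]) := by
  have hget : ∀ (p : Int × Int) (k : Int),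
      (PySem.Dict.ofList [((0, 0), (0 : Int))]).get? p = some k → p = (0, 0) ∧ k = 0 := by
    intro p k hp
    rw [pvD0_get] at hp
    split_ifs at hp with h
    exact ⟨h.symm, (Option.some.inj hp).symm⟩
  refine ⟨?_, ?_, ?_, ?_, ?_, ?_, ?_, ?_, le_refl 0, ?_⟩
  · intro p k hp
    obtain ⟨rfl, rfl⟩ := hget p k hp
    exact pvReach.start
  · rw [pvD0_get, if_pos rfl]
  · intro p hp
    rcases List.mem_cons.mp hp with rfl | hcon
    · exact ⟨0, by rw [pvD0_get, if_pos rfl], le_refl 0, by omega⟩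
    · cases hcon
  · intro p hp
    cases hp
  · intro p dp hp
    obtain ⟨rfl, rfl⟩ := hget p dp hp
    exact Or.inl ⟨List.mem_cons_self, rfl⟩
  · intro dt hdt
    obtain ⟨heq, rfl⟩ := hget _ dt hdt
    exact Or.inl ⟨by rw [← heq]; exact List.mem_cons_self, rfl⟩
  · intro p dp hp
    obtain ⟨rfl, rfl⟩ := hget p dp hp
    omega
  · intro j hj
    exact pvReach_nonneg hj
  · intro p dp hp
    obtain ⟨rfl, rfl⟩ := hget p dp hp
    exact ⟨le_refl 0, hr, le_refl 0, hc⟩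

lemma pvPhiSt_init_lt (rows cols : Int) (hr : 0 < rows) (hc : 0 < cols) :
    pvPhiSt rows cols (rows + cols).toNat
      ([(0, 0)], [], PySem.Dict.ofList [((0, 0), (0 : Int))]) < solveFuel rows cols := by
  lift rows to ℕ using hr.le with R
  lift cols to ℕ using hc.le with C
  have hR : 1 ≤ R := by exact_mod_cast hr
  have hC : 1 ≤ C := by exact_mod_cast hc
  have hphile := pvPhi_D0_le (R : Int) (C : Int) (((R : Int)) + C).toNat
    (by exact_mod_cast hR) (by exact_mod_cast hC)
  have hmul : (((R : Int)) * C).toNat = R * C := by rw [← Nat.cast_mul, Int.toNat_natCast]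
  have hadd : (((R : Int)) + C).toNat = R + C := by omega
  have hineq := pvNat_fuel_ineq R C hR hC
  simp only [pvPhiSt, List.length_cons, List.length_nil]
  unfold solveFuel
  rw [hmul, hadd]
  rw [hadd] at hphile
  simp only [Int.toNat_natCast] at hphile
  omega

lemma pvL_correct (grid : List (List Int)) (hpre : Pre_solve grid) (dlt : Int)
    (hdlt : pvIsDelta grid (grid.length : Int) ((grid.headD []).length : Int)
      ((grid.length : Int) - 1, ((grid.headD []).length : Int) - 1) dlt) :
    pvLRun grid = dlt := by
  obtain ⟨hrows0, hcols0, _⟩ := hpre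
  cases grid with
  | nil => simp at hrows0
  | cons row0 rest =>
    simp only [List.headD_cons] at hdlt hcols0
    set rows : Int := ((row0 :: rest).length : Int) with hrowsdef
    set cols : Int := (row0.length : Int) with hcolsdef
    have hr : 0 < rows := by rw [hrowsdef]; exact_mod_cast hrows0
    have hc : 0 < cols := by rw [hcolsdef]; exact_mod_cast hcols0
    have hrc : 2 ≤ rows + cols := by omega
    obtain ⟨k, hk0, hk1, hk⟩ := pvStaircase (row0 :: rest) rows cols
      ((rows - 1 + (cols - 1)).toNat) (rows - 1) (cols - 1)
      (by omega) (by omega) (by omega) (by omega) (by omega)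
    have hbound : dlt ≤ rows + cols - 2 := by
      have := hdlt.2 k hk
      omega
    unfold pvLRun
    simp only [PySem.List.pyGetD_zero_cons]
    apply pvL_main (row0 :: rest) rows cols dlt hdlt hbound hrc
    · exact pvInv_init _ rows cols hr hc
    · -- fuel bound
      exact pvPhiSt_init_lt rows cols hr hc

-- ---------- B-side: properties of the relaxation sweep ----------

def pvGood (grid : List (List Int)) (rows cols : Int) (D : PySem.Dict (Int × Int) Int) : Prop :=
  (∀ p k, D.get? p = some k → pvReach grid rows cols k p) ∧ D.get? (0, 0) = some 0

def pvDLE (D D' : PySem.Dict (Int × Int) Int) : Prop :=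
  ∀ p k, D.get? p = some k → ∃ k', D'.get? p = some k' ∧ k' ≤ k

lemma pvDLE_refl (D : PySem.Dict (Int × Int) Int) : pvDLE D D :=
  fun p k hp => ⟨k, hp, le_refl k⟩

lemma pvDLE_trans {D1 D2 D3 : PySem.Dict (Int × Int) Int} (h1 : pvDLE D1 D2)
    (h2 : pvDLE D2 D3) : pvDLE D1 D3 := by
  intro p k hp
  obtain ⟨k', hk', hle'⟩ := h1 p k hp
  obtain ⟨k'', hk'', hle''⟩ := h2 p k' hk'
  exact ⟨k'', hk'', by omega⟩

lemma pvDLE_persist {D D' : PySem.Dict (Int × Int) Int} {q : Int × Int} {bnd : Int}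
    (hdle : pvDLE D D') (h : ∃ w, D.get? q = some w ∧ w ≤ bnd) :
    ∃ w, D'.get? q = some w ∧ w ≤ bnd := by
  obtain ⟨w, hw, hwle⟩ := h
  obtain ⟨w', hw', hle'⟩ := hdle q w hw
  exact ⟨w', hw', by omega⟩

lemma bfDirBody_props (grid : List (List Int)) (rows cols a b d0 : Int) (ch : Bool)
    (D : PySem.Dict (Int × Int) Int) (d dr dc : Int)
    (hd : d ∈ pvDirsL) (hmv : pvMv d (a, b) = (a + dr, b + dc))
    (hdd : ¬ (dr = 0 ∧ dc = 0))
    (hGood : pvGood grid rows cols D) (hd0 : D.get? (a, b) = some d0) :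
    pvGood grid rows cols (bfDirBody grid rows cols a b d0 (D, ch) (d, dr, dc)).1 ∧
    pvDLE D (bfDirBody grid rows cols a b d0 (D, ch) (d, dr, dc)).1 ∧
    (pvInb rows cols (pvMv d (a, b)) →
      ∃ w, (bfDirBody grid rows cols a b d0 (D, ch) (d, dr, dc)).1.get? (pvMv d (a, b)) =
        some w ∧ w ≤ d0 + pvWt grid (a, b) d) ∧
    ((bfDirBody grid rows cols a b d0 (D, ch) (d, dr, dc)).2 = false →
      bfDirBody grid rows cols a b d0 (D, ch) (d, dr, dc) = (D, ch)) ∧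
    (ch = true → (bfDirBody grid rows cols a b d0 (D, ch) (d, dr, dc)).2 = true) ∧
    (bfDirBody grid rows cols a b d0 (D, ch) (d, dr, dc)).1.get? (a, b) = D.get? (a, b) := by
  have hd00 : 0 ≤ d0 := pvReach_nonneg (hGood.1 (a, b) d0 hd0)
  have hwt := pvWt_nonneg grid (a, b) d
  have hnd : d0 + (if d = PySem.List.pyGetD (PySem.List.pyGetD grid a []) b 0 then (0 : Int)
      else 1) = d0 + pvWt grid (a, b) d := by
    unfold pvWt pvCell
    rfl
  have habw : ((a : Int), b) ≠ (a + dr, b + dc) := by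
    intro hcon
    have h1 : a = a + dr := by simpa using congrArg Prod.fst hcon
    have h2 : b = b + dc := by simpa using congrArg Prod.snd hcon
    exact hdd ⟨by omega, by omega⟩
  simp only [bfDirBody]
  by_cases hb : 0 ≤ a + dr ∧ a + dr < rows ∧ 0 ≤ b + dc ∧ b + dc < cols
  · rw [if_pos hb]
    have hinb' : pvInb rows cols (pvMv d (a, b)) := by rw [hmv]; exact hb
    have hins : ∀ (hprev : ∀ bb, D.get? (a + dr, b + dc) = some bb →
          d0 + pvWt grid (a, b) d < bb),
        pvGood grid rows cols (D.insert (a + dr, b + dc) (d0 + pvWt grid (a, b) d)) ∧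
        pvDLE D (D.insert (a + dr, b + dc) (d0 + pvWt grid (a, b) d)) ∧
        (∃ w, (D.insert (a + dr, b + dc) (d0 + pvWt grid (a, b) d)).get? (pvMv d (a, b)) =
          some w ∧ w ≤ d0 + pvWt grid (a, b) d) := by
      intro hprev
      have hDins : ∀ (p : Int × Int),
          (D.insert (a + dr, b + dc) (d0 + pvWt grid (a, b) d)).get? p =
          if p = (a + dr, b + dc) then some (d0 + pvWt grid (a, b) d) else D.get? p :=
        fun p => PySem.Dict.get?_insert D (a + dr, b + dc) p _
      refine ⟨⟨?_, ?_⟩, ?_, ?_⟩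
      · intro p k hp
        rw [hDins] at hp
        split_ifs at hp with hpw
        · subst hpw
          have hk : k = d0 + pvWt grid (a, b) d := (Option.some.inj hp).symm
          subst hk
          have := pvReach.step d (hGood.1 (a, b) d0 hd0) hd hinb'
          rwa [hmv] at this
        · exact hGood.1 p k hp
      · have hz : ((0, 0) : Int × Int) ≠ (a + dr, b + dc) := by
          intro hcon
          rw [← hcon] at hprev
          have := hprev 0 hGood.2
          omega
        rw [hDins, if_neg hz]
        exact hGood.2
      · intro p k hp
        rw [hDins]
        by_cases hpw : p = (a + dr, b + dc)
        · rw [if_pos hpw]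
          refine ⟨_, rfl, ?_⟩
          rw [hpw] at hp
          have := hprev k hp
          omega
        · rw [if_neg hpw]
          exact ⟨k, hp, le_refl k⟩
      · rw [hmv, hDins, if_pos rfl]
        exact ⟨_, rfl, le_refl _⟩
    cases hg : D.get? (a + dr, b + dc) with
    | none =>
        simp only [hnd]
        have h3 := hins (by intro bb hbb; rw [hbb] at hg; cases hg)
        refine ⟨h3.1, h3.2.1, fun _ => h3.2.2, ?_, ?_, ?_⟩
        · intro hcon
          exact absurd hcon (by simp)
        · intro _
          simp
        · rw [PySem.Dict.get?_insert, if_neg habw]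
    | some cur =>
        simp only [hnd]
        by_cases hlt : d0 + pvWt grid (a, b) d < cur
        · rw [if_pos hlt]
          have h3 := hins (by
            intro bb hbb
            rw [hbb] at hg
            have : bb = cur := Option.some.inj hg
            omega)
          refine ⟨h3.1, h3.2.1, fun _ => h3.2.2, ?_, ?_, ?_⟩
          · intro hcon
            exact absurd hcon (by simp)
          · intro _
            simp
          · rw [PySem.Dict.get?_insert, if_neg habw]
        · rw [if_neg hlt]
          refine ⟨hGood, pvDLE_refl D, ?_, fun _ => rfl, fun h => h, rfl⟩
          intro _
          rw [hmv]
          exact ⟨cur, hg, by omega⟩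
  · rw [if_neg hb]
    refine ⟨hGood, pvDLE_refl D, ?_, fun _ => rfl, fun h => h, rfl⟩
    intro hin
    rw [hmv] at hin
    exact absurd hin (by simpa [pvInb] using hb)

lemma bfCell_props (grid : List (List Int)) (rows cols a b : Int)
    (st : PySem.Dict (Int × Int) Int × Bool) (hGood : pvGood grid rows cols st.1) :
    pvGood grid rows cols (bfCell grid rows cols st a b).1 ∧
    pvDLE st.1 (bfCell grid rows cols st a b).1 ∧
    ((bfCell grid rows cols st a b).2 = false → bfCell grid rows cols st a b = st) ∧
    (st.2 = true → (bfCell grid rows cols st a b).2 = true) ∧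
    (∀ d0, st.1.get? (a, b) = some d0 → ∀ d ∈ pvDirsL, pvInb rows cols (pvMv d (a, b)) →
      ∃ w, (bfCell grid rows cols st a b).1.get? (pvMv d (a, b)) = some w ∧
        w ≤ d0 + pvWt grid (a, b) d) := by
  obtain ⟨D, ch⟩ := st
  cases hdget : D.get? (a, b) with
  | none =>
      have hid : bfCell grid rows cols (D, ch) a b = (D, ch) := by
        simp only [bfCell, hdget]
      rw [hid]
      refine ⟨hGood, pvDLE_refl D, fun _ => rfl, fun h => h, ?_⟩
      intro d0 hd0
      cases hd0
  | some d0 =>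
      simp only [bfCell, hdget, bfDirs, List.foldl_cons, List.foldl_nil]
      have p1 := bfDirBody_props grid rows cols a b d0 ch D 1 0 1 (by simp [pvDirsL])
        (by simp [pvMv, Prod.ext_iff] <;> omega) (by simp) hGood hdget
      set st1 := bfDirBody grid rows cols a b d0 (D, ch) (1, 0, 1) with hst1
      have hd1 : st1.1.get? (a, b) = some d0 := by rw [p1.2.2.2.2.2]; exact hdget
      have p2 := bfDirBody_props grid rows cols a b d0 st1.2 st1.1 2 0 (-1) (by simp [pvDirsL])
        (by simp [pvMv, Prod.ext_iff] <;> omega) (by simp) p1.1 hd1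
      set st2 := bfDirBody grid rows cols a b d0 (st1.1, st1.2) (2, 0, -1) with hst2
      have hd2 : st2.1.get? (a, b) = some d0 := by rw [p2.2.2.2.2.2]; exact hd1
      have p3 := bfDirBody_props grid rows cols a b d0 st2.2 st2.1 3 1 0 (by simp [pvDirsL])
        (by simp [pvMv, Prod.ext_iff] <;> omega) (by simp) p2.1 hd2
      set st3 := bfDirBody grid rows cols a b d0 (st2.1, st2.2) (3, 1, 0) with hst3
      have hd3 : st3.1.get? (a, b) = some d0 := by rw [p3.2.2.2.2.2]; exact hd2
      have p4 := bfDirBody_props grid rows cols a b d0 st3.2 st3.1 4 (-1) 0 (by simp [pvDirsL])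
        (by simp [pvMv, Prod.ext_iff] <;> omega) (by simp) p3.1 hd3
      set st4 := bfDirBody grid rows cols a b d0 (st3.1, st3.2) (4, -1, 0) with hst4
      have hdle23 : pvDLE st2.1 st4.1 := pvDLE_trans p3.2.1 p4.2.1
      have hdle13 : pvDLE st1.1 st4.1 := pvDLE_trans p2.2.1 hdle23
      refine ⟨p4.1, pvDLE_trans p1.2.1 hdle13, ?_, ?_, ?_⟩
      · -- flag false → identity
        intro hfl
        have h4 := p4.2.2.2.1 hfl
        have h3fl : st3.2 = false := by
          by_contra hcon
          have := p4.2.2.2.2.1 (by revert hcon; cases st3.2 <;> simp)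
          rw [hfl] at this
          cases this
        have h3 := p3.2.2.2.1 h3fl
        have h2fl : st2.2 = false := by
          by_contra hcon
          have := p3.2.2.2.2.1 (by revert hcon; cases st2.2 <;> simp)
          rw [h3fl] at this
          cases this
        have h2 := p2.2.2.2.1 h2fl
        have h1fl : st1.2 = false := by
          by_contra hcon
          have := p2.2.2.2.2.1 (by revert hcon; cases st1.2 <;> simp)
          rw [h2fl] at this
          cases this
        have h1 := p1.2.2.2.1 h1fl
        calc st4 = (st3.1, st3.2) := h4
        _ = st3 := rfl
        _ = (st2.1, st2.2) := h3
        _ = st2 := rfl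
        _ = (st1.1, st1.2) := h2
        _ = st1 := rfl
        _ = (D, ch) := h1
      · -- flag monotone
        intro hch
        exact p4.2.2.2.2.1 (p3.2.2.2.2.1 (p2.2.2.2.2.1 (p1.2.2.2.2.1 hch)))
      · -- relaxation of all four directions
        intro d0' hd0' d hd hin
        have hd0eq : d0' = d0 := (Option.some.inj hd0').symm
        subst hd0eq
        simp only [pvDirsL, List.mem_cons, List.not_mem_nil, or_false] at hd
        rcases hd with rfl | rfl | rfl | rfl
        · exact pvDLE_persist hdle13 (p1.2.2.1 hin)
        · exact pvDLE_persist hdle23 (p2.2.2.1 hin)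
        · exact pvDLE_persist p4.2.1 (p3.2.2.1 hin)
        · exact p4.2.2.1 hin

def pvStepOK (grid : List (List Int)) (rows cols : Int) {γ : Type}
    (f : PySem.Dict (Int × Int) Int × Bool → γ → PySem.Dict (Int × Int) Int × Bool)
    (l : List γ) : Prop :=
  ∀ st x, x ∈ l → pvGood grid rows cols st.1 →
    pvGood grid rows cols (f st x).1 ∧ pvDLE st.1 (f st x).1 ∧
    ((f st x).2 = false → f st x = st) ∧ (st.2 = true → (f st x).2 = true)

lemma pvFoldGP (grid : List (List Int)) (rows cols : Int) {γ : Type}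
    (f : PySem.Dict (Int × Int) Int × Bool → γ → PySem.Dict (Int × Int) Int × Bool)
    (l : List γ) (H : pvStepOK grid rows cols f l) :
    ∀ st, pvGood grid rows cols st.1 →
      pvGood grid rows cols (l.foldl f st).1 ∧ pvDLE st.1 (l.foldl f st).1 ∧
      ((l.foldl f st).2 = false → l.foldl f st = st) ∧
      (st.2 = true → (l.foldl f st).2 = true) := by
  induction l with
  | nil => exact fun st h => ⟨h, pvDLE_refl _, fun _ => rfl, fun h => h⟩
  | cons x xs ih =>
      intro st hGood
      have hx := H st x List.mem_cons_self hGood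
      have ihp := ih (fun st y hy => H st y (List.mem_cons_of_mem _ hy)) (f st x) hx.1
      simp only [List.foldl_cons]
      refine ⟨ihp.1, pvDLE_trans hx.2.1 ihp.2.1, ?_, ?_⟩
      · intro hfl
        have h1 : (f st x).2 = false := by
          by_contra hcon
          have := ihp.2.2.2 (by revert hcon; cases (f st x).2 <;> simp)
          rw [hfl] at this
          cases this
        rw [ihp.2.2.1 hfl, hx.2.2.1 h1]
      · intro hch
        exact ihp.2.2.2 (hx.2.2.2 hch)

lemma bfRow_stepOK (grid : List (List Int)) (rows cols : Int) (r : Int) :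
    pvStepOK grid rows cols (fun st c => bfCell grid rows cols st r c)
      (PySem.List.pyRange 0 cols 1) := by
  intro st c _ hGood
  have h := bfCell_props grid rows cols r c st hGood
  exact ⟨h.1, h.2.1, h.2.2.1, h.2.2.2.1⟩

lemma bfSweep_stepOK (grid : List (List Int)) (rows cols : Int) :
    pvStepOK grid rows cols
      (fun st r => (PySem.List.pyRange 0 cols 1).foldl
        (fun st c => bfCell grid rows cols st r c) st)
      (PySem.List.pyRange 0 rows 1) := by
  intro st r _ hGood
  have h := pvFoldGP grid rows cols _ _ (bfRow_stepOK grid rows cols r) st hGood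
  exact ⟨h.1, h.2.1, h.2.2.1, h.2.2.2⟩

lemma bfSweep_props (grid : List (List Int)) (rows cols : Int)
    (D : PySem.Dict (Int × Int) Int) (hGood : pvGood grid rows cols D) :
    pvGood grid rows cols (bfSweep grid rows cols D).1 ∧
    pvDLE D (bfSweep grid rows cols D).1 ∧
    ((bfSweep grid rows cols D).2 = false → (bfSweep grid rows cols D).1 = D) := by
  have h := pvFoldGP grid rows cols _ _ (bfSweep_stepOK grid rows cols) (D, false) hGood
  refine ⟨h.1, h.2.1, ?_⟩
  intro hfl
  have := h.2.2.1 hfl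
  exact congrArg Prod.fst this

lemma bfSweep_relax (grid : List (List Int)) (rows cols : Int)
    (D : PySem.Dict (Int × Int) Int) (hGood : pvGood grid rows cols D)
    (a b du : Int) (hdu : D.get? (a, b) = some du) (hin : pvInb rows cols (a, b))
    (d : Int) (hd : d ∈ pvDirsL) (hmvin : pvInb rows cols (pvMv d (a, b))) :
    ∃ w, (bfSweep grid rows cols D).1.get? (pvMv d (a, b)) = some w ∧
      w ≤ du + pvWt grid (a, b) d := by
  obtain ⟨s, t, hsplit⟩ := List.append_of_mem
    (PySem.List.mem_pyRange_one.mpr ⟨hin.1, hin.2.1⟩)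
  obtain ⟨s2, t2, hsplit2⟩ := List.append_of_mem
    (PySem.List.mem_pyRange_one.mpr ⟨hin.2.2.1, hin.2.2.2⟩)
  unfold bfSweep
  rw [hsplit, List.foldl_append, List.foldl_cons]
  set frow := fun (st : PySem.Dict (Int × Int) Int × Bool) (r : Int) =>
    (PySem.List.pyRange 0 cols 1).foldl (fun st c => bfCell grid rows cols st r c) st
    with hfrow
  have hsOK : pvStepOK grid rows cols frow s := by
    intro st x hx hg
    exact bfSweep_stepOK grid rows cols st x (by rw [hsplit]; exact List.mem_append_left _ hx) hg
  have htOK : pvStepOK grid rows cols frow t := by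
    intro st x hx hg
    exact bfSweep_stepOK grid rows cols st x
      (by rw [hsplit]; exact List.mem_append_right _ (List.mem_cons_of_mem _ hx)) hg
  have hpre := pvFoldGP grid rows cols frow s hsOK (D, false) hGood
  set stPre := s.foldl frow (D, false) with hstPre
  obtain ⟨du1, hdu1, hdu1le⟩ := hpre.2.1 (a, b) du hdu
  -- process row a: split the inner fold at column b
  have hrow : frow stPre a =
      t2.foldl (fun st c => bfCell grid rows cols st a c)
        (bfCell grid rows cols
          (s2.foldl (fun st c => bfCell grid rows cols st a c) stPre) a b) := by
    rw [hfrow]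
    simp only
    rw [hsplit2, List.foldl_append, List.foldl_cons]
  have hs2OK : pvStepOK grid rows cols (fun st c => bfCell grid rows cols st a c) s2 := by
    intro st x _ hg
    have h := bfCell_props grid rows cols a x st hg
    exact ⟨h.1, h.2.1, h.2.2.1, h.2.2.2.1⟩
  have ht2OK : pvStepOK grid rows cols (fun st c => bfCell grid rows cols st a c) t2 := by
    intro st x _ hg
    have h := bfCell_props grid rows cols a x st hg
    exact ⟨h.1, h.2.1, h.2.2.1, h.2.2.2.1⟩
  have hpre2 := pvFoldGP grid rows cols _ s2 hs2OK stPre hpre.1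
  set stPre2 := s2.foldl (fun st c => bfCell grid rows cols st a c) stPre with hstPre2
  obtain ⟨du2, hdu2, hdu2le⟩ := hpre2.2.1 (a, b) du1 hdu1
  have hcell := bfCell_props grid rows cols a b stPre2 hpre2.1
  have hrelax := hcell.2.2.2.2 du2 hdu2 d hd hmvin
  obtain ⟨w, hw, hwle⟩ := hrelax
  have hpost2 := pvFoldGP grid rows cols _ t2 ht2OK
    (bfCell grid rows cols stPre2 a b) hcell.1
  obtain ⟨w2, hw2, hw2le⟩ := hpost2.2.1 _ w hw
  have hpost := pvFoldGP grid rows cols frow t htOK (frow stPre a) (by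
    rw [hrow]; exact hpost2.1)
  rw [hrow] at hpost
  obtain ⟨w3, hw3, hw3le⟩ := hpost.2.1 _ w2 hw2
  rw [← hrow] at hw3
  exact ⟨w3, hw3, by omega⟩

lemma pvFix_complete (grid : List (List Int)) (rows cols : Int)
    (D : PySem.Dict (Int × Int) Int) (hzero : D.get? (0, 0) = some 0)
    (hrel : ∀ u du, D.get? u = some du → ∀ d ∈ pvDirsL, pvInb rows cols (pvMv d u) →
      ∃ w, D.get? (pvMv d u) = some w ∧ w ≤ du + pvWt grid u d) :
    ∀ k v, pvReach grid rows cols k v → ∃ w, D.get? v = some w ∧ w ≤ k := by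
  intro k v h
  induction h with
  | start => exact ⟨0, hzero, le_refl 0⟩
  | @step k' u d hr hd hin ih =>
      obtain ⟨w, hw, hwle⟩ := ih
      obtain ⟨w', hw', hwle'⟩ := hrel u w hw d hd hin
      exact ⟨w', hw', by omega⟩

-- ---------- walks as vertex lists, and removal of repeated cells ----------

def pvDirOf (u v : Int × Int) : Int :=
  if v.2 = u.2 + 1 then 1 else if v.2 = u.2 - 1 then 2 else if v.1 = u.1 + 1 then 3 else 4

def pvEwt (grid : List (List Int)) (u v : Int × Int) : Int := pvWt grid u (pvDirOf u v)

def pvWalkL (grid : List (List Int)) (rows cols : Int) : List (Int × Int) → Prop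
  | [] => True
  | [_] => True
  | u :: v :: t => (∃ d ∈ pvDirsL, pvMv d u = v ∧ pvInb rows cols v) ∧
      pvWalkL grid rows cols (v :: t)

def pvCost (grid : List (List Int)) : List (Int × Int) → Int
  | u :: v :: t => pvEwt grid u v + pvCost grid (v :: t)
  | _ => 0

lemma pvDirOf_mv (u : Int × Int) (d : Int) (hd : d ∈ pvDirsL) :
    pvDirOf u (pvMv d u) = d := by
  simp only [pvDirsL, List.mem_cons, List.not_mem_nil, or_false] at hd
  rcases hd with rfl | rfl | rfl | rfl <;> simp only [pvMv, pvDirOf] <;> norm_num <;> omega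

lemma pvEwt_mv (grid : List (List Int)) (u : Int × Int) (d : Int) (hd : d ∈ pvDirsL) :
    pvEwt grid u (pvMv d u) = pvWt grid u d := by
  unfold pvEwt
  rw [pvDirOf_mv u d hd]

lemma pvCost_nonneg (grid : List (List Int)) : ∀ l, 0 ≤ pvCost grid l := by
  intro l
  induction l with
  | nil => simp [pvCost]
  | cons u t ih =>
      cases t with
      | nil => simp [pvCost]
      | cons v t' =>
          have hw := pvWt_nonneg grid u (pvDirOf u v)
          simp only [pvCost]
          have : 0 ≤ pvEwt grid u v := hw.1
          omega

lemma pvWalk_inb {grid : List (List Int)} {rows cols : Int} :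
    ∀ (l : List (Int × Int)) (u : Int × Int), pvInb rows cols u →
      pvWalkL grid rows cols (u :: l) → ∀ x ∈ u :: l, pvInb rows cols x := by
  intro l
  induction l with
  | nil =>
      intro u hu _ x hx
      rcases List.mem_cons.mp hx with rfl | hcon
      · exact hu
      · cases hcon
  | cons v t ih =>
      intro u hu hw x hx
      obtain ⟨⟨d, _, _, hvin⟩, hw'⟩ := hw
      rcases List.mem_cons.mp hx with rfl | hx
      · exact hu
      · exact ih v hvin hw' x hx

lemma pvGetLastD_mem {α : Type} : ∀ (l : List α) (u : α), l.getLastD u ∈ u :: l := by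
  intro l
  induction l with
  | nil => intro u; simp
  | cons a l ih =>
      intro u
      rw [List.getLastD_cons]
      rcases List.mem_cons.mp (ih a) with h | h
      · exact List.mem_cons_of_mem _ (by rw [h]; exact List.mem_cons_self)
      · exact List.mem_cons_of_mem _ (List.mem_cons_of_mem _ h)

lemma pvWalk_to_RF {grid : List (List Int)} {rows cols : Int} :
    ∀ (l : List (Int × Int)) (u : Int × Int), pvWalkL grid rows cols (u :: l) →
      pvRF grid rows cols u (pvCost grid (u :: l)) (l.getLastD u) := by
  intro l
  induction l with
  | nil =>
      intro u _
      exact pvRF.refl u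
  | cons w l' ih =>
      intro u hw
      obtain ⟨⟨d, hd, hmv, hin⟩, hw'⟩ := hw
      have hrf := ih w hw'
      rw [← hmv] at hrf
      have h2 := pvRF.cons (grid := grid) (rows := rows) (cols := cols) d hd
        (by rw [hmv]; exact hin) hrf
      simp only [pvCost, List.getLastD_cons]
      rw [← hmv, pvEwt_mv grid u d hd]
      exact h2

lemma pvRF_iff_walk {grid : List (List Int)} {rows cols : Int} {u : Int × Int} {c : Int}
    {v : Int × Int} :
    pvRF grid rows cols u c v ↔
      ∃ l, pvWalkL grid rows cols (u :: l) ∧ l.getLastD u = v ∧ pvCost grid (u :: l) = c := by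
  constructor
  · intro h
    induction h with
    | refl u => exact ⟨[], trivial, rfl, rfl⟩
    | @cons u' c' v' d hd hin hsub ih =>
        obtain ⟨l', hw', hlast', hcost'⟩ := ih
        refine ⟨pvMv d u' :: l', ⟨⟨d, hd, rfl, hin⟩, hw'⟩, ?_, ?_⟩
        · rw [List.getLastD_cons]
          exact hlast'
        · simp only [pvCost]
          rw [pvEwt_mv grid u' d hd, hcost']
  · intro ⟨l, hw, hlast, hcost⟩
    subst hlast hcost
    exact pvWalk_to_RF l u hw

lemma pvDupSplit {α : Type} [DecidableEq α] :
    ∀ (l : List α), ¬ l.Nodup → ∃ (x : α) (s t r : List α), l = s ++ x :: (t ++ x :: r) := by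
  intro l
  induction l with
  | nil => intro h; exact absurd List.nodup_nil h
  | cons a l ih =>
      intro h
      by_cases ha : a ∈ l
      · obtain ⟨s, t, hst⟩ := List.append_of_mem ha
        exact ⟨a, [], s, t, by rw [hst]; rfl⟩
      · have : ¬ l.Nodup := by
          intro hcon
          exact h (List.nodup_cons.mpr ⟨ha, hcon⟩)
        obtain ⟨x, s, t, r, hl⟩ := ih this
        exact ⟨x, a :: s, t, r, by rw [hl]; rfl⟩

lemma pvWalk_decomp {grid : List (List Int)} {rows cols : Int} :
    ∀ (s : List (Int × Int)) (x : Int × Int) (r : List (Int × Int)),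
      pvWalkL grid rows cols (s ++ x :: r) →
      pvWalkL grid rows cols (s ++ [x]) ∧ pvWalkL grid rows cols (x :: r) := by
  intro s
  induction s with
  | nil => exact fun x r h => ⟨trivial, h⟩
  | cons a s ih =>
      intro x r h
      cases s with
      | nil => exact ⟨⟨h.1, trivial⟩, h.2⟩
      | cons b s' =>
          obtain ⟨hw1, hw2⟩ := ih x r h.2
          exact ⟨⟨h.1, hw1⟩, hw2⟩

lemma pvWalk_comp {grid : List (List Int)} {rows cols : Int} :
    ∀ (s : List (Int × Int)) (x : Int × Int) (r : List (Int × Int)),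
      pvWalkL grid rows cols (s ++ [x]) → pvWalkL grid rows cols (x :: r) →
      pvWalkL grid rows cols (s ++ x :: r) := by
  intro s
  induction s with
  | nil => exact fun x r _ h2 => h2
  | cons a s ih =>
      intro x r h1 h2
      cases s with
      | nil => exact ⟨h1.1, h2⟩
      | cons b s' => exact ⟨h1.1, ih x r h1.2 h2⟩

lemma pvCost_decomp (grid : List (List Int)) :
    ∀ (s : List (Int × Int)) (x : Int × Int) (r : List (Int × Int)),
      pvCost grid (s ++ x :: r) = pvCost grid (s ++ [x]) + pvCost grid (x :: r) := by
  intro s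
  induction s with
  | nil => intro x r; simp [pvCost]
  | cons a s ih =>
      intro x r
      cases s with
      | nil => simp [pvCost]
      | cons b s' =>
          simp only [List.cons_append, pvCost] at *
          rw [ih x r]
          ring

lemma pvGetLastD_append_cons {α : Type} :
    ∀ (s : List α) (x : α) (r : List α) (d : α), (s ++ x :: r).getLastD d = r.getLastD x := by
  intro s
  induction s with
  | nil => intro x r d; exact List.getLastD_cons
  | cons a s ih =>
      intro x r d
      rw [List.cons_append, List.getLastD_cons]
      exact ih x r a

lemma pvShorten (grid : List (List Int)) (rows cols : Int) (hr : 0 < rows) (hc : 0 < cols) :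
    ∀ (n : Nat) (u : Int × Int) (l : List (Int × Int)), (u :: l).length ≤ n →
      pvInb rows cols u → pvWalkL grid rows cols (u :: l) →
      ∃ l', pvWalkL grid rows cols (u :: l') ∧ l'.getLastD u = l.getLastD u ∧
        pvCost grid (u :: l') ≤ pvCost grid (u :: l) ∧
        (u :: l').length ≤ rows.toNat * cols.toNat := by
  intro n
  induction n with
  | zero =>
      intro u l hlen
      simp at hlen
  | succ n ih =>
      intro u l hlen hu hw
      by_cases hnd : (u :: l).Nodup
      · refine ⟨l, hw, rfl, le_refl _, ?_⟩
        have hsub : (u :: l).toFinset ⊆ pvCellsF rows cols := by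
          intro x hx
          rw [List.mem_toFinset] at hx
          exact pvMem_cellsF.mpr (pvWalk_inb l u hu hw x hx)
        have h1 := List.toFinset_card_of_nodup hnd
        have h2 := Finset.card_le_card hsub
        rw [pvCellsF_card rows cols hr hc] at h2
        omega
      · obtain ⟨x, s, t, r, hsplit⟩ := pvDupSplit (u :: l) hnd
        cases s with
        | nil =>
            -- u = x, l = t ++ x :: r; shorten to u :: r
            simp only [List.nil_append] at hsplit
            have hux : u = x := (List.cons.injEq _ _ _ _).mp hsplit |>.1
            have hl : l = t ++ x :: r := (List.cons.injEq _ _ _ _).mp hsplit |>.2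
            subst hux
            have hwfull : pvWalkL grid rows cols ((u :: t) ++ u :: r) := by
              rw [List.cons_append, ← hl]
              exact hw
            have hdec := pvWalk_decomp (u :: t) u r hwfull
            have hw2 : pvWalkL grid rows cols (u :: r) := hdec.2
            have hlen2 : (u :: r).length ≤ n := by
              have hh : (u :: l).length ≤ n + 1 := hlen
              rw [hl] at hh
              simp only [List.length_cons, List.length_append] at hh ⊢
              omega
            obtain ⟨l', hw', hlast', hcost', hlen'⟩ := ih u r hlen2 hu hw2
            refine ⟨l', hw', ?_, ?_, hlen'⟩
            · rw [hlast', hl, pvGetLastD_append_cons]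
            · have hcc : pvCost grid (u :: l) = pvCost grid ((u :: t) ++ [u]) +
                  pvCost grid (u :: r) := by
                rw [hl, ← List.cons_append]
                exact pvCost_decomp grid (u :: t) u r
              have hnn := pvCost_nonneg grid ((u :: t) ++ [u])
              omega
        | cons a s' =>
            -- u = a; l = s' ++ x :: (t ++ x :: r); shorten to u :: (s' ++ x :: r)
            rw [List.cons_append] at hsplit
            have hua : u = a := (List.cons.injEq _ _ _ _).mp hsplit |>.1
            have hl : l = s' ++ x :: (t ++ x :: r) :=
              (List.cons.injEq _ _ _ _).mp hsplit |>.2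
            subst hua
            have hwfull : pvWalkL grid rows cols ((u :: s') ++ x :: (t ++ x :: r)) := by
              rw [List.cons_append, ← hl]
              exact hw
            have hdec := pvWalk_decomp (u :: s') x (t ++ x :: r) hwfull
            have hdec2 := pvWalk_decomp (x :: t) x r hdec.2
            have hw2 : pvWalkL grid rows cols ((u :: s') ++ x :: r) :=
              pvWalk_comp (u :: s') x r hdec.1 hdec2.2
            rw [List.cons_append] at hw2
            have hlen2 : (u :: (s' ++ x :: r)).length ≤ n := by
              have hh : (u :: l).length ≤ n + 1 := hlen
              rw [hl] at hh
              simp only [List.length_cons, List.length_append] at hh ⊢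
              omega
            obtain ⟨l', hw', hlast', hcost', hlen'⟩ := ih u (s' ++ x :: r) hlen2 hu hw2
            refine ⟨l', hw', ?_, ?_, hlen'⟩
            · rw [hlast', hl, pvGetLastD_append_cons, pvGetLastD_append_cons,
                pvGetLastD_append_cons]
            · have hc1 : pvCost grid (u :: l) = pvCost grid ((u :: s') ++ [x]) +
                  (pvCost grid ((x :: t) ++ [x]) + pvCost grid (x :: r)) := by
                rw [hl, ← List.cons_append, pvCost_decomp grid (u :: s') x (t ++ x :: r),
                  show (x : Int × Int) :: (t ++ x :: r) = (x :: t) ++ x :: r by simp,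
                  pvCost_decomp grid (x :: t) x r]
              have hc2 : pvCost grid (u :: (s' ++ x :: r)) =
                  pvCost grid ((u :: s') ++ [x]) + pvCost grid (x :: r) := by
                rw [← List.cons_append]
                exact pvCost_decomp grid (u :: s') x r
              have hnn := pvCost_nonneg grid ((x :: t) ++ [x])
              omega

lemma pvWalk_last_edge {grid : List (List Int)} {rows cols : Int} :
    ∀ (l0 : List (Int × Int)) (u w : Int × Int),
      pvWalkL grid rows cols (u :: (l0 ++ [w])) →
      pvWalkL grid rows cols (u :: l0) ∧
        ∃ d ∈ pvDirsL, pvMv d (l0.getLastD u) = w ∧ pvInb rows cols w := by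
  intro l0
  induction l0 with
  | nil =>
      intro u w h
      obtain ⟨⟨d, hd, hmv, hin⟩, _⟩ := h
      exact ⟨trivial, d, hd, hmv, hin⟩
  | cons b l0' ih =>
      intro u w h
      obtain ⟨he, hw'⟩ := h
      obtain ⟨hwpre, d, hd, hmv, hin⟩ := ih b w hw'
      refine ⟨⟨he, hwpre⟩, d, hd, ?_, hin⟩
      rw [List.getLastD_cons]
      exact hmv

lemma pvCost_last_edge (grid : List (List Int)) :
    ∀ (l0 : List (Int × Int)) (u w : Int × Int),
      pvCost grid (u :: (l0 ++ [w])) = pvCost grid (u :: l0) +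
        pvEwt grid (l0.getLastD u) w := by
  intro l0
  induction l0 with
  | nil => intro u w; simp [pvCost]
  | cons b l0' ih =>
      intro u w
      simp only [List.cons_append, pvCost, List.getLastD_cons]
      rw [ih b w]
      ring

lemma bfLoop_good (grid : List (List Int)) (rows cols : Int) :
    ∀ (n : Nat) (D : PySem.Dict (Int × Int) Int), pvGood grid rows cols D →
      pvGood grid rows cols (bfLoop grid rows cols n D) := by
  intro n
  induction n with
  | zero => exact fun D h => h
  | succ n ih =>
      intro D hGood
      simp only [bfLoop]
      by_cases hch : (bfSweep grid rows cols D).2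
      · rw [if_pos hch]
        exact ih _ (bfSweep_props grid rows cols D hGood).1
      · rw [if_neg hch]
        exact (bfSweep_props grid rows cols D hGood).1

lemma bfLoop_main (grid : List (List Int)) (rows cols : Int)
    (hr : 0 < rows) (hc : 0 < cols) :
    ∀ (n : Nat) (D : PySem.Dict (Int × Int) Int) (s : Nat),
      pvGood grid rows cols D →
      (∀ (l : List (Int × Int)), pvWalkL grid rows cols ((0, 0) :: l) → l.length ≤ s →
        ∃ w, D.get? (l.getLastD (0, 0)) = some w ∧ w ≤ pvCost grid ((0, 0) :: l)) →
      rows.toNat * cols.toNat ≤ s + n + 1 →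
      ∀ k v, pvReach grid rows cols k v →
        ∃ w, (bfLoop grid rows cols n D).get? v = some w ∧ w ≤ k := by
  intro n
  induction n with
  | zero =>
      intro D s hGood hdom hfuel k v hk
      have hrf := pvReach_iff_RF.mp hk
      obtain ⟨l, hw, hlast, hcost⟩ := pvRF_iff_walk.mp hrf
      have hinb0 : pvInb rows cols ((0 : Int), (0 : Int)) := ⟨le_refl 0, hr, le_refl 0, hc⟩
      obtain ⟨l', hw', hlast', hcost', hlen'⟩ :=
        pvShorten grid rows cols hr hc (((0, 0) :: l).length) (0, 0) l (le_refl _) hinb0 hw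
      have hlen2 : l'.length ≤ s := by
        simp only [List.length_cons] at hlen'
        omega
      obtain ⟨w, hwget, hwle⟩ := hdom l' hw' hlen2
      rw [hlast', hlast] at hwget
      exact ⟨w, hwget, by omega⟩
  | succ n ih =>
      intro D s hGood hdom hfuel k v hk
      simp only [bfLoop]
      have hprops := bfSweep_props grid rows cols D hGood
      by_cases hch : (bfSweep grid rows cols D).2
      · rw [if_pos hch]
        refine ih (bfSweep grid rows cols D).1 (s + 1) hprops.1 ?_ (by omega) k v hk
        intro l hwl hlen
        rcases List.eq_nil_or_concat' l with rfl | ⟨l0, vl, rfl⟩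
        · exact ⟨0, by simpa using hprops.1.2, by simp [pvCost]⟩
        · obtain ⟨hwpre, d, hd, hmv, hvin⟩ := pvWalk_last_edge l0 (0, 0) vl hwl
          have hlen0 : l0.length ≤ s := by
            simp only [List.length_append, List.length_cons] at hlen
            omega
          obtain ⟨w0, hw0, hw0le⟩ := hdom l0 hwpre hlen0
          set prev := l0.getLastD ((0 : Int), (0 : Int)) with hprev
          have hprevin : pvInb rows cols prev := by
            have hinb0 : pvInb rows cols ((0 : Int), (0 : Int)) := ⟨le_refl 0, hr, le_refl 0, hc⟩
            exact pvWalk_inb l0 (0, 0) hinb0 hwpre prev (pvGetLastD_mem l0 (0, 0))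
          obtain ⟨pa, pb⟩ := prev
          obtain ⟨w1, hw1, hw1le⟩ := bfSweep_relax grid rows cols D hGood pa pb w0 hw0
            hprevin d hd (by rw [hmv]; exact hvin)
          rw [hmv] at hw1
          refine ⟨w1, ?_, ?_⟩
          · rw [pvGetLastD_append_cons l0 vl [] (0, 0)]
            simpa using hw1
          · have hcfull := pvCost_last_edge grid l0 (0, 0) vl
            rw [← hprev] at hcfull
            have hew : pvEwt grid (pa, pb) vl = pvWt grid (pa, pb) d := by
              rw [← hmv]
              exact pvEwt_mv grid (pa, pb) d hd
            rw [hcfull, hew]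
            omega
      · rw [if_neg hch]
        have hfix : (bfSweep grid rows cols D).1 = D :=
          hprops.2.2 (by revert hch; cases (bfSweep grid rows cols D).2 <;> simp)
        have hinb0 : pvInb rows cols ((0 : Int), (0 : Int)) := ⟨le_refl 0, hr, le_refl 0, hc⟩
        have hrel : ∀ u du, D.get? u = some du → ∀ d ∈ pvDirsL,
            pvInb rows cols (pvMv d u) →
            ∃ w, D.get? (pvMv d u) = some w ∧ w ≤ du + pvWt grid u d := by
          intro u du hdu d hd hmvin
          have huin : pvInb rows cols u := pvReach_inb hinb0 (hGood.1 u du hdu)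
          obtain ⟨ua, ub⟩ := u
          have := bfSweep_relax grid rows cols D hGood ua ub du hdu huin d hd hmvin
          rwa [hfix] at this
        obtain ⟨w, hwget, hwle⟩ := pvFix_complete grid rows cols D hGood.2 hrel k v hk
        rw [hfix]
        exact ⟨w, hwget, hwle⟩

-- main lemma stubs (discharged further below)
lemma pvA_correct (grid : List (List Int)) (hpre : Pre_solve grid) (dlt : Int)
    (hdlt : pvIsDelta grid (grid.length : Int) ((grid.headD []).length : Int)
      ((grid.length : Int) - 1, ((grid.headD []).length : Int) - 1) dlt) :
    solve grid = dlt := by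
  rw [pvA_eq_L grid hpre]
  exact pvL_correct grid hpre dlt hdlt

lemma pvB_correct (grid : List (List Int)) (hpre : Pre_solve grid) (dlt : Int)
    (hdlt : pvIsDelta grid (grid.length : Int) ((grid.headD []).length : Int)
      ((grid.length : Int) - 1, ((grid.headD []).length : Int) - 1) dlt) :
    solve_alt grid = dlt := by
  obtain ⟨hrows0, hcols0, _⟩ := hpre
  cases grid with
  | nil => simp at hrows0
  | cons row0 rest =>
    simp only [List.headD_cons] at hdlt hcols0
    set rows : Int := ((row0 :: rest).length : Int) with hrowsdef
    set cols : Int := (row0.length : Int) with hcolsdef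
    have hr : 0 < rows := by rw [hrowsdef]; exact_mod_cast hrows0
    have hc : 0 < cols := by rw [hcolsdef]; exact_mod_cast hcols0
    have hgood0 : pvGood (row0 :: rest) rows cols (PySem.Dict.ofList [((0, 0), 0)]) := by
      constructor
      · intro p k hp
        rw [pvD0_get] at hp
        split_ifs at hp with h
        rw [← h, ← (Option.some.inj hp)]
        exact pvReach.start
      · rw [pvD0_get, if_pos rfl]
    have hdom0 : ∀ (l : List (Int × Int)), pvWalkL (row0 :: rest) rows cols ((0, 0) :: l) →
        l.length ≤ 0 →
        ∃ w, (PySem.Dict.ofList [((0, 0), (0 : Int))]).get? (l.getLastD (0, 0)) = some w ∧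
          w ≤ pvCost (row0 :: rest) ((0, 0) :: l) := by
      intro l _ hlen
      have hlnil : l = [] := List.eq_nil_of_length_eq_zero (by omega)
      subst hlnil
      exact ⟨0, by simp [pvD0_get], by simp [pvCost]⟩
    have hmul : (rows * cols).toNat = rows.toNat * cols.toNat :=
      Int.toNat_mul (by omega) (by omega)
    have hfuel : rows.toNat * cols.toNat ≤ 0 + (rows * cols).toNat + 1 := by omega
    obtain ⟨w, hwget, hwle⟩ := bfLoop_main (row0 :: rest) rows cols hr hc
      ((rows * cols).toNat) (PySem.Dict.ofList [((0, 0), 0)]) 0 hgood0 hdom0 hfuel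
      dlt (rows - 1, cols - 1) hdlt.1
    have hgoodf := bfLoop_good (row0 :: rest) rows cols ((rows * cols).toNat)
      (PySem.Dict.ofList [((0, 0), 0)]) hgood0
    have hreach := hgoodf.1 _ w hwget
    have hge := hdlt.2 w hreach
    have hsolve : solve_alt (row0 :: rest) =
        ((bfLoop (row0 :: rest) rows cols ((rows * cols).toNat)
          (PySem.Dict.ofList [((0, 0), 0)])).get? (rows - 1, cols - 1)).getD 0 := by
      simp only [solve_alt, PySem.List.pyGetD_zero_cons]
      rw [← hrowsdef, ← hcolsdef]
    rw [hsolve, hwget]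
    simp only [Option.getD_some]
    omega

-- ===== VERDICT (by name: the statement is the Claim_ definition above) =====
theorem solve_spec : Claim_equal_solve := by
  unfold Claim_equal_solve
  intro grid _ hpre
  unfold Spec_solve
  have hpre2 := hpre
  obtain ⟨hrows, hcols, _⟩ := hpre
  have hrows' : (0 : Int) < (grid.length : Int) := by exact_mod_cast hrows
  have hcols' : (0 : Int) < ((grid.headD []).length : Int) := by exact_mod_cast hcols
  obtain ⟨k, hk0, hk1, hk⟩ := pvStaircase grid (grid.length : Int) ((grid.headD []).length : Int)
    (((grid.length : Int) - 1 + ((grid.headD []).length : Int) - 1).toNat)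
    ((grid.length : Int) - 1) (((grid.headD []).length : Int) - 1)
    (by omega) (by omega) (by omega) (by omega) (by omega)
  obtain ⟨dlt, hdlt⟩ := pvDelta_exists grid _ _ _ ⟨k, hk0, hk⟩
  rw [pvA_correct grid hpre2 dlt hdlt, pvB_correct grid hpre2 dlt hdlt]
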